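-- pv_equiv track=rewrite | github.com/kkujansuu/gramps | addons/findduplicates2/findduplicates2.py | genmerges
-- ===== SOURCE A (Python) =====
-- def genmerges(mergepairs):
--     """
--     Generates the correct order of merges.
--     Input: a list of handle pairs to be merged.
--     Returns: set of tuples of tuples (i,handle)
--         where i is the index of the handle in the original list
--         The index is there so that the handles are in the same order as in the original list.
--         I.e. the first handle in each tuple is the primary one.
--     Because the same handle can occur multiple times in the list
--     the merges cannot be done in the same order as the pairs appear.
--     Example:
--     Input: [(a,b),(c,d),(e,a),(c,f)]
--     Output: {((0,a),(0,b),(2,e)),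
--             ((1,c),(1,d),(3,f))}
--     """
--     map = {}  # item -> itemlist
--
--     for i, (a, b) in enumerate(mergepairs):
--         if a in map:
--             if b in map:
--                 if map[a] == map[b]:
--                     pass  # already in same set
--                 else:  # merge two sets
--                     map[a] = map[a] + map[b]
--             else:  # b not in any set
--                 map[a].append((i, b))
--         else:  # a not in any set
--             if b in map:
--                 map[b].append((i, a))
--                 map[a] = map[b]
--             else:
--                 map[a] = [(i, a), (i, b)]
--         for i, x in map[a]:
--             map[x] = map[a]
--
--     return set([tuple(sorted(x)) for x in map.values()])
-- ===== SOURCE B (Python) =====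
-- def _find(parent, h):
--     while parent[h] != h:
--         h = parent[h]
--     return h
--
--
-- def genmerges(mergepairs):
--     # Union-find: a parent forest over handles plus a first-pair index per handle;
--     # components are read off at the end by grouping the registered entries by root.
--     parent = {}   # handle -> parent handle (roots point to themselves)
--     firsti = {}   # handle -> index of the pair that introduced it
--     entries = []  # one (first-pair-index, handle) entry per endpoint new to its pair
--     for i, (a, b) in enumerate(mergepairs):
--         for h in [h for h in (a, b) if h not in parent]:
--             parent[h] = h
--             firsti[h] = i
--             entries.append((i, h))
--         ra, rb = _find(parent, a), _find(parent, b)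
--         if ra != rb:
--             if (firsti[rb], rb) < (firsti[ra], ra):
--                 ra, rb = rb, ra
--             parent[rb] = ra   # the root introduced earlier becomes the representative
--     groups = {}
--     for i, h in entries:
--         groups.setdefault(_find(parent, h), []).append((i, h))
--     return set(tuple(sorted(g)) for g in groups.values())
-- ===== Notes on version B (the rewrite author's own statement) =====
-- stated objective: alternative
-- what changed: A keeps one shared mutable entry-list per handle and after every pair rebuilds and re-points the whole component (concatenating both lists on a merge); B runs a union-find parent forest (roots keyed by first occurrence) doing two root look-ups and at most one pointer write per pair, and reads the components off once at the end by grouping the registered (first-index, handle) entries by root.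
import Mathlib
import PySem

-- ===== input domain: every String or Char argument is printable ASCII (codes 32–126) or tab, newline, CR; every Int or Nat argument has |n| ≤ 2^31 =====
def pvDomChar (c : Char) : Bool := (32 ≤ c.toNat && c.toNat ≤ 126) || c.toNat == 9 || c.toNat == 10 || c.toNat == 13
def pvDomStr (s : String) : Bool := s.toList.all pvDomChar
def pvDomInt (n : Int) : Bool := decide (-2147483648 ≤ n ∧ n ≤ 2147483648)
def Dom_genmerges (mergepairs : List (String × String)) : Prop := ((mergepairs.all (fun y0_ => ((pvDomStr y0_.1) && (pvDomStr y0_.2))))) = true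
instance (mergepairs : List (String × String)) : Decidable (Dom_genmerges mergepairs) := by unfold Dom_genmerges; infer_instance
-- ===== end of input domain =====

-- B replaces A's per-handle shared component lists (rebuilt and wholly re-pointed on
-- every pair) by a union-find parent forest: each pair does two root look-ups and at
-- most one pointer write, and components are read off once at the end by grouping the
-- registered (first-index, handle) entries by root.

-- ===== PORT A =====
-- One iteration of A's loop.  A's dict holds SHARED mutable lists; this value-semantics
-- port carries the same dict, and Python's trailing loop 'for i, x in map[a]: map[x] = map[a]'
-- (transliterated as the foldl below) re-points every member key exactly as A does.
def genmergesStep (m : PySem.Dict String (List (Int × String)))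
    (p : Int × (String × String)) : PySem.Dict String (List (Int × String)) :=
  let i := p.1
  let a := p.2.1
  let b := p.2.2
  let m1 :=
    if m.contains a then
      if m.contains b then
        if m.getD a [] == m.getD b [] then m          -- already in same set
        else m.insert a (m.getD a [] ++ m.getD b [])  -- merge two sets
      else m.insert a (m.getD a [] ++ [(i, b)])       -- b not in any set
    else
      if m.contains b then
        (m.insert b (m.getD b [] ++ [(i, a)])).insert a (m.getD b [] ++ [(i, a)])
      else m.insert a [(i, a), (i, b)]
  (m1.getD a []).foldl (fun mm e => mm.insert e.2 (m1.getD a [])) m1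

def genmerges (mergepairs : List (String × String)) : List (List (Int × String)) :=
  let m := (PySem.List.enumerate mergepairs 0).foldl genmergesStep PySem.Dict.empty
  PySem.Set.ofList (m.values.map (fun x => PySem.List.sorted2 x (fun e => e.1) (fun e => e.2)))

-- ===== PORT B =====
-- '_find': follow parent pointers to the root.  The Python while-loop is ported with
-- fuel; fuel = number of keys suffices because parent chains strictly descend (proved
-- below).  The 'none' fallback is unreachable: _find is only applied to keys of parent.
def findRootB (fuel : Nat) (parent : PySem.Dict String String) (h : String) : String :=
  match fuel with
  | 0 => h
  | f + 1 =>
    match parent.get? h with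
    | some p => if p = h then h else findRootB f parent p
    | none => h

-- One iteration of B's loop over the pairs: state = (parent, firsti, entries).
def genmergesAltStep
    (st : PySem.Dict String String × PySem.Dict String Int × List (Int × String))
    (p : Int × (String × String)) :
    PySem.Dict String String × PySem.Dict String Int × List (Int × String) :=
  let i := p.1
  let a := p.2.1
  let b := p.2.2
  -- '[h for h in (a, b) if h not in parent]' is evaluated against the pre-pair state
  let st1 := ([a, b].filter (fun h => !(st.1.contains h))).foldl
      (fun s h => (s.1.insert h h, s.2.1.insert h i, s.2.2 ++ [(i, h)])) st
  let ra := findRootB st1.1.keys.length st1.1 a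
  let rb := findRootB st1.1.keys.length st1.1 b
  if ra ≠ rb then
    -- '(firsti[rb], rb) < (firsti[ra], ra)' : Python tuple comparison, written out;
    -- firsti always has both roots, so the getD defaults are never consulted
    let pr := if st1.2.1.getD rb 0 < st1.2.1.getD ra 0 ∨
        (st1.2.1.getD rb 0 = st1.2.1.getD ra 0 ∧ rb < ra) then (rb, ra) else (ra, rb)
    (st1.1.insert pr.2 pr.1, st1.2.1, st1.2.2)
  else st1

def genmerges_alt (mergepairs : List (String × String)) : List (List (Int × String)) :=
  let st := (PySem.List.enumerate mergepairs 0).foldl genmergesAltStep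
      (PySem.Dict.empty, PySem.Dict.empty, [])
  -- 'groups.setdefault(_find(parent, h), []).append((i, h))'
  let groups := st.2.2.foldl (fun g e =>
      let r := findRootB st.1.keys.length st.1 e.2
      g.insert r (g.getD r [] ++ [e])) PySem.Dict.empty
  PySem.Set.ofList (groups.values.map (fun gl => PySem.List.sorted2 gl (fun e => e.1) (fun e => e.2)))

-- ===== PRECONDITION & SPEC =====
def Spec_genmerges (mergepairs : List (String × String)) (out : List (List (Int × String))) : Prop := out = genmerges_alt mergepairs
instance (mergepairs : List (String × String)) (out : List (List (Int × String))) : Decidable (Spec_genmerges mergepairs out) := by unfold Spec_genmerges; infer_instance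

-- ===== CLAIM (what is proved, stated in full; the proofs are below) =====
def Claim_equal_genmerges : Prop := ∀ (mergepairs : List (String × String)), Dom_genmerges mergepairs → Spec_genmerges mergepairs (genmerges mergepairs)

-- ===== LEMMAS AND PROOFS =====

-- the common sort of an entry list, and its Mathlib-friendly form (lex key)
def sortE (l : List (Int × String)) : List (Int × String) :=
  PySem.List.sorted2 l (fun e => e.1) (fun e => e.2)

theorem sortE_eq (l : List (Int × String)) :
    sortE l = PySem.List.sorted l (fun e => (toLex e : Lex (Int × String))) := by
  unfold sortE PySem.List.sorted2 PySem.List.sorted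
  simp only [if_neg (by decide : ¬ (false = true))]
  have hb : (fun (a b : Int × String) =>
      (decide (a.1 < b.1) || (!decide (b.1 < a.1) && decide (a.2 < b.2)))) =
      (fun (a b : Int × String) => decide ((toLex a : Lex (Int × String)) < toLex b)) := by
    funext a b
    rcases lt_trichotomy a.1 b.1 with h1 | h1 | h1
    · simp [h1, Prod.Lex.lt_iff, not_lt.2 h1.le]
    · simp [h1, Prod.Lex.lt_iff]
    · simp [not_lt.2 h1.le, h1, Prod.Lex.lt_iff, ne_of_gt h1]
  rw [hb]

theorem sortE_perm_eq {l l' : List (Int × String)} (h : l.Perm l') : sortE l = sortE l' := by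
  rw [sortE_eq, sortE_eq]
  exact PySem.List.sorted_eq_sorted_of_perm l l' _ (fun x y hxy => by
    simpa using congrArg (fun z => (ofLex z : Int × String)) hxy) h

theorem mem_sortE {e : Int × String} {l : List (Int × String)} : e ∈ sortE l ↔ e ∈ l := by
  exact (PySem.List.sorted2_perm l _ _ false).mem_iff

-- generic dict facts
theorem contains_false_of_get?_none {κ ν : Type} [BEq κ] (d : PySem.Dict κ ν) {k : κ}
    (h : d.get? k = none) : d.contains k = false := by
  rw [PySem.Dict.contains_eq_isSome_get?, h]; rfl

theorem contains_true_of_get?_some {κ ν : Type} [BEq κ] (d : PySem.Dict κ ν) {k : κ} {v : ν}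
    (h : d.get? k = some v) : d.contains k = true := by
  rw [PySem.Dict.contains_eq_isSome_get?, h]; rfl

theorem key_get? {ν : Type} (d : PySem.Dict String ν) (d0 : ν) {h : String}
    (hh : h ∈ d.keys) : d.get? h = some (d.getD h d0) := by
  cases hk : d.get? h with
  | none => exact absurd hh ((PySem.Dict.get?_eq_none_iff_not_mem_keys d h).1 hk)
  | some v => rw [PySem.Dict.getD_eq_get?_getD, hk]; rfl

theorem mem_keys_of_get?_some {ν : Type} (d : PySem.Dict String ν) {x : String} {v : ν}
    (h : d.get? x = some v) : x ∈ d.keys := by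
  by_contra hmem
  rw [(PySem.Dict.get?_eq_none_iff_not_mem_keys d x).2 hmem] at h
  cases h

theorem get?_none_of_not_mem {ν : Type} (d : PySem.Dict String ν) {x : String}
    (h : x ∉ d.keys) : d.get? x = none :=
  (PySem.Dict.get?_eq_none_iff_not_mem_keys d x).2 h

-- a fold of constant-valued inserts, looked up
theorem get?_foldl_insert_snd {ν : Type} (L : List (Int × String)) (v : ν)
    (d : PySem.Dict String ν) (h : String) :
    (L.foldl (fun mm e => mm.insert e.2 v) d).get? h =
      if h ∈ L.map (fun e => e.2) then some v else d.get? h := by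
  induction L generalizing d with
  | nil => simp
  | cons e t ih =>
      rw [List.foldl_cons, ih]
      by_cases hm : h ∈ t.map (fun e => e.2)
      · simp [hm]
      · by_cases he : h = e.2
        · simp [he, PySem.Dict.get?_insert_self]
        · simp [hm, he, PySem.Dict.get?_insert]

theorem update_self {α : Type} [BEq α] [LawfulBEq α] (s : PySem.Set α) (xs : List α)
    (h : ∀ x ∈ xs, x ∈ s) : PySem.Set.update s xs = s := by
  rw [PySem.Set.update_eq_append_filter]
  have hf : (PySem.Set.ofList xs).filter (fun y => !PySem.Set.contains s y) = [] := by
    apply List.filter_eq_nil_iff.2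
    intro y hy
    have hys : y ∈ s := h y ((PySem.Set.mem_ofList xs y).1 hy)
    simpa using hys
  rw [hf, List.append_nil]

-- the re-pointing loop of A, as a function of the pivot key
def syncA (a : String) (m1 : PySem.Dict String (List (Int × String))) :
    PySem.Dict String (List (Int × String)) :=
  (m1.getD a []).foldl (fun mm e => mm.insert e.2 (m1.getD a [])) m1

theorem get?_syncA (a : String) (m1 : PySem.Dict String (List (Int × String))) (h : String) :
    (syncA a m1).get? h = if h ∈ (m1.getD a []).map (fun e => e.2) then some (m1.getD a [])
      else m1.get? h :=
  get?_foldl_insert_snd _ _ _ _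

theorem keys_syncA (a : String) (m1 : PySem.Dict String (List (Int × String))) :
    (syncA a m1).keys = PySem.Set.update m1.keys ((m1.getD a []).map (fun e => e.2)) :=
  PySem.Dict.keys_foldl_insert_key _ _ _ _

-- ===== the union-find forest theory =====

-- strict order on (first-index, handle) keys: Python's tuple '<'
abbrev ufLt (u v : Int × String) : Prop := u.1 < v.1 ∨ (u.1 = v.1 ∧ u.2 < v.2)

theorem ufLt_irrefl (u : Int × String) : ¬ ufLt u u := by
  rintro (h | ⟨h1, h2⟩)
  · exact lt_irrefl _ h
  · exact lt_irrefl _ h2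

theorem ufLt_trans {u v w : Int × String} (h1 : ufLt u v) (h2 : ufLt v w) : ufLt u w := by
  rcases h1 with h1 | ⟨h1a, h1b⟩ <;> rcases h2 with h2 | ⟨h2a, h2b⟩
  · exact Or.inl (lt_trans h1 h2)
  · exact Or.inl (h2a ▸ h1)
  · exact Or.inl (h1a ▸ h2)
  · exact Or.inr ⟨h1a.trans h2a, lt_trans h1b h2b⟩

theorem ufLt_total {u v : Int × String} (h : u ≠ v) : ufLt u v ∨ ufLt v u := by
  rcases lt_trichotomy u.1 v.1 with h1 | h1 | h1
  · exact Or.inl (Or.inl h1)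
  · rcases lt_trichotomy u.2 v.2 with h2 | h2 | h2
    · exact Or.inl (Or.inr ⟨h1, h2⟩)
    · exact absurd (Prod.ext h1 h2) h
    · exact Or.inr (Or.inr ⟨h1.symm, h2⟩)
  · exact Or.inr (Or.inl h1)

-- 'h eventually reaches root r by following parent pointers'
inductive Reaches (parent : PySem.Dict String String) : String → String → Prop where
  | root (h : String) (hh : parent.get? h = some h) : Reaches parent h h
  | step (h p r : String) (hp : parent.get? h = some p) (hne : p ≠ h)
      (hr : Reaches parent p r) : Reaches parent h r

theorem reaches_root_fix {parent : PySem.Dict String String} {h r : String}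
    (hre : Reaches parent h r) : parent.get? r = some r := by
  induction hre with
  | root h hh => exact hh
  | step h p r hp hne hr ih => exact ih

theorem reaches_mem {parent : PySem.Dict String String} {h r : String}
    (hre : Reaches parent h r) : h ∈ parent.keys ∧ r ∈ parent.keys := by
  induction hre with
  | root h hh => exact ⟨mem_keys_of_get?_some _ hh, mem_keys_of_get?_some _ hh⟩
  | step h p r hp hne hr ih => exact ⟨mem_keys_of_get?_some _ hp, ih.2⟩

theorem reaches_unique {parent : PySem.Dict String String} {h r r' : String}
    (h1 : Reaches parent h r) (h2 : Reaches parent h r') : r = r' := by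
  induction h1 generalizing r' with
  | root h hh =>
      cases h2 with
      | root _ _ => rfl
      | step _ p _ hp hne _ =>
          rw [hh] at hp
          exact absurd (Option.some.inj hp).symm hne
  | step h p r hp hne hr ih =>
      cases h2 with
      | root _ hh =>
          rw [hh] at hp
          exact absurd (Option.some.inj hp).symm hne
      | step _ p' _ hp' hne' hr' =>
          rw [hp] at hp'
          exact ih (by rwa [← Option.some.inj hp'] at hr')

-- the forest invariant: every parent pointer stays among the keys and strictly
-- decreases the (first-index, handle) key unless it is a self-loop (a root)
def ForestInv (parent : PySem.Dict String String) (firsti : PySem.Dict String Int) : Prop :=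
  ∀ h p, parent.get? h = some p →
    p ∈ parent.keys ∧ (p = h ∨ ufLt (firsti.getD p 0, p) (firsti.getD h 0, h))

def rankOf (parent : PySem.Dict String String) (firsti : PySem.Dict String Int)
    (h : String) : Nat :=
  (parent.keys.filter (fun x => decide (ufLt (firsti.getD x 0, x) (firsti.getD h 0, h)))).length

theorem length_filter_mono {α : Type} (l : List α) (q q' : α → Bool)
    (himp : ∀ y ∈ l, q y = true → q' y = true) :
    (l.filter q).length ≤ (l.filter q').length := by
  induction l with
  | nil => simp
  | cons y t ih =>
      have iht := ih (fun z hz => himp z (List.mem_cons_of_mem _ hz))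
      rw [List.filter_cons, List.filter_cons]
      by_cases hq : q y = true
      · rw [if_pos hq, if_pos (himp y List.mem_cons_self hq)]
        simpa using iht
      · rw [if_neg hq]
        by_cases hq' : q' y = true
        · rw [if_pos hq']
          exact le_trans iht (by simp)
        · rw [if_neg hq']
          exact iht

theorem length_filter_lt {α : Type} (l : List α) (q q' : α → Bool) (x : α) (hx : x ∈ l)
    (himp : ∀ y ∈ l, q y = true → q' y = true) (hqx : q x = false) (hq'x : q' x = true) :
    (l.filter q).length < (l.filter q').length := by
  induction l with
  | nil => cases hx
  | cons y t ih =>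
      rw [List.filter_cons, List.filter_cons]
      by_cases hxy : x = y
      · subst hxy
        rw [if_neg (by simp [hqx]), if_pos hq'x]
        have := length_filter_mono t q q' (fun z hz => himp z (List.mem_cons_of_mem _ hz))
        simpa using Nat.lt_succ_of_le this
      · have hxt : x ∈ t := by
          rcases List.mem_cons.1 hx with h | h
          · exact absurd h hxy
          · exact h
        have iht := ih hxt (fun z hz => himp z (List.mem_cons_of_mem _ hz))
        by_cases hq : q y = true
        · rw [if_pos hq, if_pos (himp y List.mem_cons_self hq)]
          simpa using iht
        · rw [if_neg hq]
          by_cases hq' : q' y = true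
          · rw [if_pos hq']
            simp only [List.length_cons]
            omega
          · rw [if_neg hq']
            exact iht

theorem length_filter_lt_len {α : Type} (l : List α) (q : α → Bool) (x : α) (hx : x ∈ l)
    (hqx : q x = false) : (l.filter q).length < l.length := by
  have := length_filter_lt l q (fun _ => true) x hx (fun _ _ _ => rfl) hqx rfl
  simpa using this

theorem rank_lt {parent : PySem.Dict String String} {firsti : PySem.Dict String Int}
    {p h : String} (hp : p ∈ parent.keys)
    (hlt : ufLt (firsti.getD p 0, p) (firsti.getD h 0, h)) :
    rankOf parent firsti p < rankOf parent firsti h := by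
  apply length_filter_lt parent.keys _ _ p hp
  · intro y _ hy
    exact decide_eq_true (ufLt_trans (of_decide_eq_true hy) hlt)
  · exact decide_eq_false (ufLt_irrefl _)
  · exact decide_eq_true hlt

theorem rank_lt_length {parent : PySem.Dict String String} {firsti : PySem.Dict String Int}
    {h : String} (hh : h ∈ parent.keys) :
    rankOf parent firsti h < parent.keys.length :=
  length_filter_lt_len _ _ h hh (decide_eq_false (ufLt_irrefl _))

theorem findRootB_reaches {parent : PySem.Dict String String} {firsti : PySem.Dict String Int}
    (hF : ForestInv parent firsti) :
    ∀ (fuel : Nat) (h : String), h ∈ parent.keys → rankOf parent firsti h < fuel →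
      Reaches parent h (findRootB fuel parent h) := by
  intro fuel
  induction fuel with
  | zero => intro h _ hr; omega
  | succ f ih =>
      intro h hh hr
      have hp : parent.get? h = some (parent.getD h h) := key_get? parent h hh
      have hstep : findRootB (f + 1) parent h =
          if parent.getD h h = h then h else findRootB f parent (parent.getD h h) := by
        simp only [findRootB, hp]
      rw [hstep]
      by_cases hph : parent.getD h h = h
      · rw [if_pos hph]
        exact Reaches.root h (by rw [hp, hph])
      · rw [if_neg hph]
        obtain ⟨hm, hor⟩ := hF h _ hp
        have hlt : ufLt (firsti.getD (parent.getD h h) 0, parent.getD h h)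
            (firsti.getD h 0, h) := by
          rcases hor with he | hl
          · exact absurd he hph
          · exact hl
        have hrk : rankOf parent firsti (parent.getD h h) < f := by
          have := rank_lt (firsti := firsti) hm hlt
          omega
        exact Reaches.step h _ _ hp hph (ih _ hm hrk)

-- the root function B uses (fuel = number of keys)
def rootOf (parent : PySem.Dict String String) (h : String) : String :=
  findRootB parent.keys.length parent h

theorem rootOf_reaches {parent : PySem.Dict String String} {firsti : PySem.Dict String Int}
    (hF : ForestInv parent firsti) {h : String} (hh : h ∈ parent.keys) :
    Reaches parent h (rootOf parent h) :=
  findRootB_reaches hF _ h hh (rank_lt_length hh)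

theorem rootOf_eq {parent : PySem.Dict String String} {firsti : PySem.Dict String Int}
    (hF : ForestInv parent firsti) {h r : String} (hre : Reaches parent h r) :
    rootOf parent h = r :=
  reaches_unique (rootOf_reaches hF (reaches_mem hre).1) hre

-- stability of Reaches under the two kinds of insert B performs
theorem reaches_insert_fresh {parent : PySem.Dict String String} {x : String}
    (hx : x ∉ parent.keys) {h r : String} (hre : Reaches parent h r) :
    Reaches (parent.insert x x) h r := by
  induction hre with
  | root h hh =>
      refine Reaches.root h ?_
      rw [PySem.Dict.get?_insert,
        if_neg (fun he => hx (by rw [← he]; exact mem_keys_of_get?_some _ hh))]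
      exact hh
  | step h p r hp hne hr ih =>
      refine Reaches.step h p r ?_ hne ih
      rw [PySem.Dict.get?_insert,
        if_neg (fun he => hx (by rw [← he]; exact mem_keys_of_get?_some _ hp))]
      exact hp

theorem reaches_insert_again {parent : PySem.Dict String String} {x : String}
    (hx : parent.get? x = some x) {h r : String} (hre : Reaches parent h r) :
    Reaches (parent.insert x x) h r := by
  have hkeep : ∀ y, (parent.insert x x).get? y = parent.get? y := by
    intro y
    rw [PySem.Dict.get?_insert]
    by_cases hy : y = x
    · rw [if_pos hy, hy, hx]
    · rw [if_neg hy]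
  induction hre with
  | root h hh => exact Reaches.root h (by rw [hkeep]; exact hh)
  | step h p r hp hne hr ih => exact Reaches.step h p r (by rw [hkeep]; exact hp) hne ih

theorem reaches_union_other {parent : PySem.Dict String String} {ra rb : String}
    (hrb : parent.get? rb = some rb) {h r : String} (hre : Reaches parent h r)
    (hner : r ≠ rb) : Reaches (parent.insert rb ra) h r := by
  induction hre with
  | root h hh =>
      refine Reaches.root h ?_
      rw [PySem.Dict.get?_insert, if_neg hner]
      exact hh
  | step h p r hp hne hr ih =>
      have hhb : h ≠ rb := by
        intro he
        rw [he, hrb] at hp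
        exact hne ((Option.some.inj hp).symm.trans he.symm)
      refine Reaches.step h p r ?_ hne (ih hner)
      rw [PySem.Dict.get?_insert, if_neg hhb]
      exact hp

theorem reaches_union_moved_aux {parent : PySem.Dict String String} {ra : String}
    (hra : parent.get? ra = some ra) {h r : String} (hre : Reaches parent h r) :
    ∀ rb, r = rb → ra ≠ rb → Reaches (parent.insert rb ra) h ra := by
  induction hre with
  | root h hh =>
      intro rb hrb hab
      subst hrb
      refine Reaches.step h ra ra (by rw [PySem.Dict.get?_insert_self]) (fun he => hab (he ▸ rfl)) ?_
      exact Reaches.root ra (by rw [PySem.Dict.get?_insert, if_neg hab]; exact hra)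
  | step h p r hp hne hr ih =>
      intro rb hrb hab
      have hrfix : parent.get? r = some r := reaches_root_fix hr
      have hhb : h ≠ rb := by
        intro he
        rw [he, ← hrb, hrfix] at hp
        exact hne ((Option.some.inj hp).symm.trans (hrb ▸ he.symm))
      refine Reaches.step h p ra ?_ hne (ih rb hrb hab)
      rw [PySem.Dict.get?_insert, if_neg hhb]
      exact hp

theorem reaches_union_moved {parent : PySem.Dict String String} {ra rb : String}
    (hra : parent.get? ra = some ra) (hab : ra ≠ rb) {h : String}
    (hre : Reaches parent h rb) : Reaches (parent.insert rb ra) h ra :=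
  reaches_union_moved_aux hra hre rb rfl hab

-- ===== preservation of the forest invariant =====

theorem forest_insert_fresh {parent : PySem.Dict String String} {firsti : PySem.Dict String Int}
    (hF : ForestInv parent firsti) {x : String} (hx : x ∉ parent.keys) (i : Int) :
    ForestInv (parent.insert x x) (firsti.insert x i) := by
  intro h p hp
  have hgetD : ∀ y, y ≠ x → (firsti.insert x i).getD y 0 = firsti.getD y 0 := by
    intro y hy
    rw [PySem.Dict.getD_insert, if_neg hy]
  by_cases hhx : h = x
  · rw [hhx, PySem.Dict.get?_insert_self] at hp
    have hpx : p = x := (Option.some.inj hp).symm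
    refine ⟨?_, Or.inl (hpx.trans hhx.symm)⟩
    rw [hpx]
    exact (PySem.Dict.mem_keys_insert _ _ _ _).2 (Or.inl rfl)
  · rw [PySem.Dict.get?_insert, if_neg hhx] at hp
    obtain ⟨hm, hor⟩ := hF h p hp
    have hpx : p ≠ x := fun he => hx (he ▸ hm)
    refine ⟨(PySem.Dict.mem_keys_insert _ _ _ _).2 (Or.inr hm), ?_⟩
    rcases hor with he | hl
    · exact Or.inl he
    · right
      rw [hgetD p hpx, hgetD h hhx]
      exact hl

theorem forest_insert_again {parent : PySem.Dict String String} {firsti : PySem.Dict String Int}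
    (hF : ForestInv parent firsti) {x : String} (hx : parent.get? x = some x) {i : Int}
    (hfx : firsti.getD x 0 = i) :
    ForestInv (parent.insert x x) (firsti.insert x i) := by
  have hget : ∀ y, (parent.insert x x).get? y = parent.get? y := by
    intro y
    rw [PySem.Dict.get?_insert]
    by_cases hy : y = x
    · rw [if_pos hy, hy, hx]
    · rw [if_neg hy]
  have hgd : ∀ y, (firsti.insert x i).getD y 0 = firsti.getD y 0 := by
    intro y
    rw [PySem.Dict.getD_insert]
    by_cases hy : y = x
    · rw [if_pos hy, hy, hfx]
    · rw [if_neg hy]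
  intro h p hp
  rw [hget] at hp
  obtain ⟨hm, hor⟩ := hF h p hp
  refine ⟨(PySem.Dict.mem_keys_insert _ _ _ _).2 (Or.inr hm), ?_⟩
  rcases hor with he | hl
  · exact Or.inl he
  · right
    rw [hgd p, hgd h]
    exact hl

theorem forest_union {parent : PySem.Dict String String} {firsti : PySem.Dict String Int}
    (hF : ForestInv parent firsti) {win lose : String}
    (hwin : parent.get? win = some win)
    (hlt : ufLt (firsti.getD win 0, win) (firsti.getD lose 0, lose)) :
    ForestInv (parent.insert lose win) firsti := by
  intro h p hp
  by_cases hhl : h = lose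
  · subst hhl
    rw [PySem.Dict.get?_insert_self] at hp
    have hpw : p = win := (Option.some.inj hp).symm
    subst hpw
    exact ⟨(PySem.Dict.mem_keys_insert _ _ _ _).2 (Or.inr (mem_keys_of_get?_some _ hwin)), Or.inr hlt⟩
  · rw [PySem.Dict.get?_insert, if_neg hhl] at hp
    obtain ⟨hm, hor⟩ := hF h p hp
    exact ⟨(PySem.Dict.mem_keys_insert _ _ _ _).2 (Or.inr hm), hor⟩

-- ===== the simulation invariant between A's dict and B's (parent, firsti, entries) =====

structure SimInv (m : PySem.Dict String (List (Int × String)))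
    (parent : PySem.Dict String String) (firsti : PySem.Dict String Int)
    (entries : List (Int × String)) : Prop where
  keysP : parent.keys = m.keys
  keysF : firsti.keys = m.keys
  keysE : m.keys = PySem.Set.ofList (entries.map (fun e => e.2))
  forest : ForestInv parent firsti
  val_perm : ∀ h, h ∈ m.keys →
    (m.getD h []).Perm (entries.filter (fun e => rootOf parent e.2 == rootOf parent h))
  val_eq : ∀ h h', h ∈ m.keys → h' ∈ m.keys → rootOf parent h = rootOf parent h' →
    m.get? h = m.get? h'

theorem sim_nodup {m parent firsti entries} (inv : SimInv m parent firsti entries) :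
    m.keys.Nodup := by
  rw [inv.keysE]
  exact PySem.Set.nodup_ofList _

theorem sim_entry_mem {m parent firsti entries} (inv : SimInv m parent firsti entries)
    {e : Int × String} (he : e ∈ entries) : e.2 ∈ m.keys := by
  rw [inv.keysE]
  exact (PySem.Set.mem_ofList _ _).2 (List.mem_map.2 ⟨e, he, rfl⟩)

theorem sim_exists_entry {m parent firsti entries} (inv : SimInv m parent firsti entries)
    {h : String} (hh : h ∈ m.keys) : ∃ j, (j, h) ∈ entries := by
  rw [inv.keysE] at hh
  obtain ⟨e, he, h2⟩ := List.mem_map.1 ((PySem.Set.mem_ofList _ _).1 hh)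
  obtain ⟨j, x⟩ := e
  cases h2
  exact ⟨j, he⟩

theorem sim_root_mem {m parent firsti entries} (inv : SimInv m parent firsti entries)
    {h : String} (hh : h ∈ m.keys) :
    rootOf parent h ∈ m.keys ∧ parent.get? (rootOf parent h) = some (rootOf parent h) := by
  have hh' : h ∈ parent.keys := by rw [inv.keysP]; exact hh
  have hre := rootOf_reaches inv.forest hh'
  exact ⟨by rw [← inv.keysP]; exact (reaches_mem hre).2, reaches_root_fix hre⟩

theorem mem_val_iff {m parent firsti entries} (inv : SimInv m parent firsti entries)
    {h : String} (hh : h ∈ m.keys) (x : String) :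
    x ∈ (m.getD h []).map (fun e => e.2) ↔
      (x ∈ m.keys ∧ rootOf parent x = rootOf parent h) := by
  constructor
  · intro hx
    obtain ⟨e, he, hee⟩ := List.mem_map.1 hx
    have he' := (inv.val_perm h hh).mem_iff.1 he
    obtain ⟨hent, hpred⟩ := List.mem_filter.1 he'
    refine ⟨hee ▸ sim_entry_mem inv hent, ?_⟩
    rw [← hee]
    exact eq_of_beq hpred
  · rintro ⟨hxm, hxr⟩
    obtain ⟨j, hj⟩ := sim_exists_entry inv hxm
    have h1 : (j, x) ∈ entries.filter (fun e => rootOf parent e.2 == rootOf parent h) :=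
      List.mem_filter.2 ⟨hj, by simp [hxr]⟩
    exact List.mem_map.2 ⟨(j, x), (inv.val_perm h hh).mem_iff.2 h1, rfl⟩

theorem root_eq_of_val_eq {m parent firsti entries} (inv : SimInv m parent firsti entries)
    {a b : String} (ha : a ∈ m.keys) (hb : b ∈ m.keys)
    (heq : m.getD a [] = m.getD b []) : rootOf parent a = rootOf parent b := by
  obtain ⟨j, hj⟩ := sim_exists_entry inv hb
  have h1 : (j, b) ∈ m.getD b [] :=
    (inv.val_perm b hb).mem_iff.2 (List.mem_filter.2 ⟨hj, by simp⟩)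
  rw [← heq] at h1
  have h2 := (List.mem_filter.1 ((inv.val_perm a ha).mem_iff.1 h1)).2
  exact (eq_of_beq h2).symm

theorem beq_true_of_same_root {m parent firsti entries} (inv : SimInv m parent firsti entries)
    {a b : String} (ha : a ∈ m.keys) (hb : b ∈ m.keys)
    (hr : rootOf parent a = rootOf parent b) : (m.getD a [] == m.getD b []) = true := by
  have := inv.val_eq a b ha hb hr
  rw [PySem.Dict.getD_eq_get?_getD, PySem.Dict.getD_eq_get?_getD, this]
  exact beq_self_eq_true _

theorem beq_false_of_diff_root {m parent firsti entries} (inv : SimInv m parent firsti entries)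
    {a b : String} (ha : a ∈ m.keys) (hb : b ∈ m.keys)
    (hr : rootOf parent a ≠ rootOf parent b) : (m.getD a [] == m.getD b []) = false := by
  apply beq_eq_false_iff_ne.2
  intro heq
  exact hr (root_eq_of_val_eq inv ha hb heq)

-- a filter by a disjunction of disjoint predicates splits into the two filters
theorem filter_or_perm {α : Type} (l : List α) (p q : α → Bool)
    (hdis : ∀ x ∈ l, ¬(p x = true ∧ q x = true)) :
    (l.filter (fun x => p x || q x)).Perm (l.filter p ++ l.filter q) := by
  induction l with
  | nil => simp
  | cons x t ih =>
      have iht := ih (fun z hz => hdis z (List.mem_cons_of_mem _ hz))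
      by_cases hp : p x = true
      · have hq : q x = false := by
          cases hqv : q x
          · rfl
          · exact absurd ⟨hp, hqv⟩ (hdis x List.mem_cons_self)
        simp only [List.filter_cons, hp, hq, Bool.true_or, if_pos, Bool.false_eq_true,
          if_neg, if_true, if_false]
        simpa using iht.cons x
      · have hp' : p x = false := by
          cases hpv : p x
          · rfl
          · exact absurd hpv hp
        by_cases hq : q x = true
        · simp only [List.filter_cons, hp', hq, Bool.false_or, if_true,
            Bool.false_eq_true, if_false]
          exact (iht.cons x).trans List.perm_middle.symm
        · have hq' : q x = false := by
            cases hqv : q x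
            · rfl
            · exact absurd hqv hq
          simp only [List.filter_cons, hp', hq', Bool.or_self, Bool.false_eq_true, if_false]
          exact iht

-- ===== the grouping loop of B =====

theorem groups_get? (l : List (Int × String)) (k : String → String) :
    ∀ r, (l.foldl (fun g e => g.insert (k e.2) (g.getD (k e.2) [] ++ [e]))
      (PySem.Dict.empty : PySem.Dict String (List (Int × String)))).get? r =
    if r ∈ l.map (fun e => k e.2) then some (l.filter (fun e => k e.2 == r)) else none := by
  induction l using List.reverseRecOn with
  | nil => intro r; simp [PySem.Dict.get?_empty]
  | append_singleton t e ih =>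
      intro r
      rw [List.foldl_append, List.foldl_cons, List.foldl_nil, PySem.Dict.get?_insert]
      by_cases hr : r = k e.2
      · subst hr
        have hgd : (t.foldl (fun g e => g.insert (k e.2) (g.getD (k e.2) [] ++ [e]))
            (PySem.Dict.empty : PySem.Dict String (List (Int × String)))).getD (k e.2) [] =
            t.filter (fun e' => k e'.2 == k e.2) := by
          rw [PySem.Dict.getD_eq_get?_getD, ih (k e.2)]
          by_cases hm : k e.2 ∈ t.map (fun e => k e.2)
          · rw [if_pos hm]
            rfl
          · rw [if_neg hm]
            have hnil : t.filter (fun e' => k e'.2 == k e.2) = [] := by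
              apply List.filter_eq_nil_iff.2
              intro e' he'
              simp only [bne_iff_ne, ne_eq, Bool.not_eq_true, beq_eq_false_iff_ne]
              intro hk
              exact hm (List.mem_map.2 ⟨e', he', hk⟩)
            rw [hnil]
            rfl
        rw [if_pos rfl, hgd, if_pos (by simp)]
        rw [List.filter_append]
        simp
      · rw [if_neg hr, ih r]
        have hmem : (r ∈ (t ++ [e]).map (fun e => k e.2)) ↔ (r ∈ t.map (fun e => k e.2)) := by
          simp only [List.map_append, List.map_cons, List.map_nil, List.mem_append,
            List.mem_singleton]
          constructor
          · rintro (h | h)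
            · exact h
            · exact absurd h hr
          · exact Or.inl
        have hfil : (t ++ [e]).filter (fun e' => k e'.2 == r) =
            t.filter (fun e' => k e'.2 == r) := by
          rw [List.filter_append]
          have hb : (k e.2 == r) = false := beq_eq_false_iff_ne.2 (fun he => hr he.symm)
          have : [e].filter (fun e' => k e'.2 == r) = [] := by simp [hb]
          rw [this, List.append_nil]
        by_cases hm : r ∈ t.map (fun e => k e.2)
        · rw [if_pos hm, if_pos (hmem.2 hm), hfil]
        · rw [if_neg hm, if_neg (fun hx => hm (hmem.1 hx))]

theorem groups_keys (l : List (Int × String)) (k : String → String) :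
    (l.foldl (fun g e => g.insert (k e.2) (g.getD (k e.2) [] ++ [e]))
      (PySem.Dict.empty : PySem.Dict String (List (Int × String)))).keys =
    PySem.Set.ofList (l.map (fun e => k e.2)) := by
  induction l using List.reverseRecOn with
  | nil => simp [PySem.Dict.keys_empty]
  | append_singleton t e ih =>
      rw [List.foldl_append, List.foldl_cons, List.foldl_nil, List.map_append,
        List.map_cons, List.map_nil, PySem.Set.ofList_append_singleton]
      by_cases hm : k e.2 ∈ t.map (fun e => k e.2)
      · have hc : (t.foldl (fun g e => g.insert (k e.2) (g.getD (k e.2) [] ++ [e]))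
            (PySem.Dict.empty : PySem.Dict String (List (Int × String)))).contains (k e.2)
            = true := by
          rw [PySem.Dict.contains_eq_isSome_get?, groups_get? t k (k e.2), if_pos hm]
          rfl
        rw [PySem.Dict.keys_insert_of_contains _ _ hc, ih,
          PySem.Set.add_of_mem ((PySem.Set.mem_ofList _ _).2 hm)]
      · have hc : (t.foldl (fun g e => g.insert (k e.2) (g.getD (k e.2) [] ++ [e]))
            (PySem.Dict.empty : PySem.Dict String (List (Int × String)))).contains (k e.2)
            = false := by
          rw [PySem.Dict.contains_eq_isSome_get?, groups_get? t k (k e.2), if_neg hm]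
          rfl
        rw [PySem.Dict.keys_insert_of_not_contains _ _ hc, ih,
          PySem.Set.add_of_not_mem (fun hx => hm ((PySem.Set.mem_ofList _ _).1 hx))]

-- ===== PySem.Set helpers =====

theorem ofList_map_injOn {α β : Type} [BEq α] [LawfulBEq α] [BEq β] [LawfulBEq β]
    (V : List α) (g : α → β) (hinj : ∀ x ∈ V, ∀ y ∈ V, g x = g y → x = y) :
    PySem.Set.ofList (V.map g) = (PySem.Set.ofList V).map g := by
  induction V using List.reverseRecOn with
  | nil => rfl
  | append_singleton t x ih =>
      have hinj' : ∀ x ∈ t, ∀ y ∈ t, g x = g y → x = y := fun u hu v hv =>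
        hinj u (List.mem_append_left _ hu) v (List.mem_append_left _ hv)
      rw [List.map_append, List.map_singleton, PySem.Set.ofList_append_singleton,
        PySem.Set.ofList_append_singleton, ih hinj']
      by_cases hx : x ∈ PySem.Set.ofList t
      · have hxt : x ∈ t := (PySem.Set.mem_ofList t x).1 hx
        rw [PySem.Set.add_of_mem hx, PySem.Set.add_of_mem
          (List.mem_map.2 ⟨x, hx, rfl⟩)]
      · have hxt : x ∉ t := fun h => hx ((PySem.Set.mem_ofList t x).2 h)
        have hgx : g x ∉ (PySem.Set.ofList t).map g := by
          intro hmem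
          obtain ⟨y, hy, hgy⟩ := List.mem_map.1 hmem
          have hyt : y ∈ t := (PySem.Set.mem_ofList t y).1 hy
          exact hxt (hinj y (List.mem_append_left _ hyt) x
            (List.mem_append_right _ (List.mem_singleton_self x)) hgy ▸ hyt)
        rw [PySem.Set.add_of_not_mem hx, PySem.Set.add_of_not_mem hgx, List.map_append,
          List.map_singleton]

theorem ofList_map_ofList {α β : Type} [BEq α] [LawfulBEq α] [BEq β] [LawfulBEq β]
    (l : List α) (φ : α → β) :
    PySem.Set.ofList ((PySem.Set.ofList l).map φ) = PySem.Set.ofList (l.map φ) := by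
  induction l using List.reverseRecOn with
  | nil => rfl
  | append_singleton t x ih =>
      rw [List.map_append, List.map_singleton, PySem.Set.ofList_append_singleton,
        PySem.Set.ofList_append_singleton]
      by_cases hx : x ∈ PySem.Set.ofList t
      · have hxt : x ∈ t := (PySem.Set.mem_ofList t x).1 hx
        rw [PySem.Set.add_of_mem hx, ih,
          PySem.Set.add_of_mem ((PySem.Set.mem_ofList _ _).2 (List.mem_map.2 ⟨x, hxt, rfl⟩))]
      · rw [PySem.Set.add_of_not_mem hx, List.map_append, List.map_singleton,
          PySem.Set.ofList_append_singleton, ih]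

-- ===== the outputs agree for any invariant-related pair of final states =====

theorem final_eq {m : PySem.Dict String (List (Int × String))}
    {parent : PySem.Dict String String} {firsti : PySem.Dict String Int}
    {entries : List (Int × String)} (inv : SimInv m parent firsti entries) :
    PySem.Set.ofList (m.values.map sortE) =
    PySem.Set.ofList ((entries.foldl (fun g e =>
        g.insert (rootOf parent e.2) (g.getD (rootOf parent e.2) [] ++ [e]))
        (PySem.Dict.empty : PySem.Dict String (List (Int × String)))).values.map sortE) := by
  have hnd : m.keys.Nodup := sim_nodup inv
  set G := entries.foldl (fun g e =>
      g.insert (rootOf parent e.2) (g.getD (rootOf parent e.2) [] ++ [e]))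
      (PySem.Dict.empty : PySem.Dict String (List (Int × String))) with hG
  have hinj : ∀ u ∈ (entries.map (fun e => e.2)).map (fun x => rootOf parent x),
      ∀ v ∈ (entries.map (fun e => e.2)).map (fun x => rootOf parent x),
      sortE (entries.filter (fun e => rootOf parent e.2 == u)) =
        sortE (entries.filter (fun e => rootOf parent e.2 == v)) → u = v := by
    intro u hu v hv hguv
    obtain ⟨x, hx, hxu⟩ := List.mem_map.1 hu
    have hxm : x ∈ m.keys := by
      rw [inv.keysE]
      exact (PySem.Set.mem_ofList _ _).2 hx
    obtain ⟨j, hj⟩ := sim_exists_entry inv hxm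
    have h1 : (j, x) ∈ entries.filter (fun e => rootOf parent e.2 == u) :=
      List.mem_filter.2 ⟨hj, by simp [hxu]⟩
    have h2 : (j, x) ∈ sortE (entries.filter (fun e => rootOf parent e.2 == v)) := by
      rw [← hguv]
      exact mem_sortE.2 h1
    have h3 := (List.mem_filter.1 (mem_sortE.1 h2)).2
    rw [← hxu]
    exact eq_of_beq h3
  have hvals : m.values = m.keys.map (fun h => m.getD h []) :=
    PySem.Dict.values_eq_map_keys m hnd []
  have hA : m.values.map sortE = m.keys.map
      (fun h => sortE (entries.filter (fun e => rootOf parent e.2 == rootOf parent h))) := by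
    rw [hvals, List.map_map]
    exact List.map_congr_left (fun h hh => sortE_perm_eq (inv.val_perm h hh))
  have hkeysG : G.keys = PySem.Set.ofList ((entries.map (fun e => e.2)).map
      (fun x => rootOf parent x)) := by
    rw [hG, groups_keys entries (fun x => rootOf parent x), List.map_map]
    rfl
  have hndG : G.keys.Nodup := by
    rw [hkeysG]
    exact PySem.Set.nodup_ofList _
  have hvalsG : G.values.map sortE = (PySem.Set.ofList ((entries.map (fun e => e.2)).map
      (fun x => rootOf parent x))).map
      (fun r => sortE (entries.filter (fun e => rootOf parent e.2 == r))) := by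
    rw [PySem.Dict.values_eq_map_keys G hndG [], hkeysG, List.map_map]
    apply List.map_congr_left
    intro r hr
    have hrm : r ∈ (entries.map (fun e => e.2)).map (fun x => rootOf parent x) :=
      (PySem.Set.mem_ofList _ _).1 hr
    have hrm' : r ∈ entries.map (fun e => rootOf parent e.2) := by
      rw [List.map_map] at hrm
      exact hrm
    have : G.getD r [] = entries.filter (fun e => rootOf parent e.2 == r) := by
      rw [PySem.Dict.getD_eq_get?_getD, hG, groups_get? entries (fun x => rootOf parent x) r,
        if_pos hrm']
      rfl
    rw [Function.comp_apply, this]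
  have hBnodup : ((PySem.Set.ofList ((entries.map (fun e => e.2)).map
      (fun x => rootOf parent x))).map
      (fun r => sortE (entries.filter (fun e => rootOf parent e.2 == r)))).Nodup := by
    refine List.Nodup.map_on ?_ (PySem.Set.nodup_ofList _)
    intro u hu v hv h
    exact hinj u ((PySem.Set.mem_ofList _ _).1 hu) v ((PySem.Set.mem_ofList _ _).1 hv) h
  calc PySem.Set.ofList (m.values.map sortE)
      = PySem.Set.ofList (m.keys.map (fun h =>
          sortE (entries.filter (fun e => rootOf parent e.2 == rootOf parent h)))) := by
        rw [hA]
    _ = PySem.Set.ofList ((PySem.Set.ofList (entries.map (fun e => e.2))).map (fun h =>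
          sortE (entries.filter (fun e => rootOf parent e.2 == rootOf parent h)))) := by
        rw [← inv.keysE]
    _ = PySem.Set.ofList ((entries.map (fun e => e.2)).map (fun h =>
          sortE (entries.filter (fun e => rootOf parent e.2 == rootOf parent h)))) :=
        ofList_map_ofList _ _
    _ = PySem.Set.ofList (((entries.map (fun e => e.2)).map (fun x => rootOf parent x)).map
          (fun r => sortE (entries.filter (fun e => rootOf parent e.2 == r)))) := by
        simp only [List.map_map, Function.comp_def]
    _ = (PySem.Set.ofList ((entries.map (fun e => e.2)).map (fun x => rootOf parent x))).map
          (fun r => sortE (entries.filter (fun e => rootOf parent e.2 == r))) :=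
        ofList_map_injOn _ _ hinj
    _ = PySem.Set.ofList (G.values.map sortE) := by
        rw [hvalsG]
        exact (PySem.Set.ofList_eq_self_of_nodup _ hBnodup).symm

-- membership ↔ contains, in the form the step proof needs
theorem contains_iff_mem {ν : Type} (d : PySem.Dict String ν) (x : String) :
    d.contains x = true ↔ x ∈ d.keys := by
  constructor
  · intro hc
    rw [PySem.Dict.contains_eq_isSome_get?] at hc
    cases hk : d.get? x with
    | none => rw [hk] at hc; cases hc
    | some v => exact mem_keys_of_get?_some _ hk
  · intro hm
    rw [PySem.Dict.contains_eq_isSome_get?]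
    cases hk : d.get? x with
    | none => exact absurd hm ((PySem.Dict.get?_eq_none_iff_not_mem_keys d x).1 hk)
    | some v => rfl

-- ===== step preservation: both handles already known =====

theorem step_same {m : PySem.Dict String (List (Int × String))}
    {parent : PySem.Dict String String} {firsti : PySem.Dict String Int}
    {entries : List (Int × String)} (inv : SimInv m parent firsti entries)
    {a : String} (ha : a ∈ m.keys) :
    SimInv (syncA a m) parent firsti entries := by
  have hget : ∀ h, (syncA a m).get? h = m.get? h := by
    intro h
    rw [get?_syncA]
    by_cases hh : h ∈ (m.getD a []).map (fun e => e.2)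
    · rw [if_pos hh]
      obtain ⟨hhm, hhr⟩ := (mem_val_iff inv ha h).1 hh
      rw [inv.val_eq h a hhm ha hhr, key_get? m [] ha]
    · rw [if_neg hh]
  have hkeys : (syncA a m).keys = m.keys := by
    rw [keys_syncA]
    apply update_self
    intro x hx
    exact ((mem_val_iff inv ha x).1 hx).1
  have hgetD : ∀ h, (syncA a m).getD h [] = m.getD h [] := by
    intro h
    rw [PySem.Dict.getD_eq_get?_getD, hget, ← PySem.Dict.getD_eq_get?_getD]
  refine ⟨?_, ?_, ?_, inv.forest, ?_, ?_⟩
  · rw [hkeys]; exact inv.keysP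
  · rw [hkeys]; exact inv.keysF
  · rw [hkeys]; exact inv.keysE
  · intro h hh
    rw [hgetD]
    exact inv.val_perm h (by rwa [hkeys] at hh)
  · intro h h' hh hh' hr
    rw [hget, hget]
    exact inv.val_eq h h' (by rwa [hkeys] at hh) (by rwa [hkeys] at hh') hr

theorem step_merge {m : PySem.Dict String (List (Int × String))}
    {parent : PySem.Dict String String} {firsti : PySem.Dict String Int}
    {entries : List (Int × String)} (inv : SimInv m parent firsti entries)
    {a b : String} (ha : a ∈ m.keys) (hb : b ∈ m.keys)
    (hroots : rootOf parent a ≠ rootOf parent b)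
    {win lose : String}
    (hwl : (win = rootOf parent a ∧ lose = rootOf parent b) ∨
           (win = rootOf parent b ∧ lose = rootOf parent a))
    (hlt : ufLt (firsti.getD win 0, win) (firsti.getD lose 0, lose)) :
    SimInv (syncA a (m.insert a (m.getD a [] ++ m.getD b [])))
      (parent.insert lose win) firsti entries := by
  obtain ⟨hqam, hqafix⟩ := sim_root_mem inv ha
  obtain ⟨hqbm, hqbfix⟩ := sim_root_mem inv hb
  have hwinfix : parent.get? win = some win := by
    rcases hwl with ⟨h1, _⟩ | ⟨h1, _⟩ <;> rw [h1]
    · exact hqafix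
    · exact hqbfix
  have hlosefix : parent.get? lose = some lose := by
    rcases hwl with ⟨_, h2⟩ | ⟨_, h2⟩ <;> rw [h2]
    · exact hqbfix
    · exact hqafix
  have hwlne : win ≠ lose := by
    rcases hwl with ⟨h1, h2⟩ | ⟨h1, h2⟩ <;> rw [h1, h2]
    · exact hroots
    · exact hroots.symm
  have hF2 : ForestInv (parent.insert lose win) firsti := forest_union inv.forest hwinfix hlt
  -- new root function on the old keys
  have hroot2 : ∀ h, h ∈ m.keys →
      rootOf (parent.insert lose win) h =
        (if rootOf parent h = lose then win else rootOf parent h) := by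
    intro h hh
    have hre := rootOf_reaches inv.forest (by rw [inv.keysP]; exact hh)
    by_cases hl : rootOf parent h = lose
    · rw [if_pos hl]
      exact rootOf_eq hF2 (reaches_union_moved hwinfix hwlne (hl ▸ hre))
    · rw [if_neg hl]
      exact rootOf_eq hF2 (reaches_union_other hlosefix hre hl)
  have hwl_or : ∀ h, h ∈ m.keys →
      (rootOf (parent.insert lose win) h = win ↔
        (rootOf parent h = rootOf parent a ∨ rootOf parent h = rootOf parent b)) := by
    intro h hh
    rw [hroot2 h hh]
    by_cases hl : rootOf parent h = lose
    · rw [if_pos hl]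
      simp only [true_iff]
      rcases hwl with ⟨_, h2⟩ | ⟨_, h2⟩
      · exact Or.inr (h2 ▸ hl)
      · exact Or.inl (h2 ▸ hl)
    · rw [if_neg hl]
      constructor
      · intro hw
        rcases hwl with ⟨h1, _⟩ | ⟨h1, _⟩
        · exact Or.inl (hw.trans h1)
        · exact Or.inr (hw.trans h1)
      · intro hor
        rcases hwl with ⟨h1, h2⟩ | ⟨h1, h2⟩ <;> rcases hor with hx | hx
        · exact hx.trans h1.symm
        · exact absurd (hx.trans h2.symm) hl
        · exact absurd (hx.trans h2.symm) hl
        · exact hx.trans h1.symm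
  -- A-side facts
  have hm1a : (m.insert a (m.getD a [] ++ m.getD b [])).getD a [] =
      m.getD a [] ++ m.getD b [] := by
    rw [PySem.Dict.getD_eq_get?_getD, PySem.Dict.get?_insert_self]
    rfl
  have hHd : ∀ x, x ∈ (m.getD a [] ++ m.getD b []).map (fun e => e.2) ↔
      (x ∈ m.keys ∧ (rootOf parent x = rootOf parent a ∨ rootOf parent x = rootOf parent b)) := by
    intro x
    rw [List.map_append, List.mem_append, mem_val_iff inv ha x, mem_val_iff inv hb x]
    constructor
    · rintro (⟨h1, h2⟩ | ⟨h1, h2⟩)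
      · exact ⟨h1, Or.inl h2⟩
      · exact ⟨h1, Or.inr h2⟩
    · rintro ⟨h1, h2 | h2⟩
      · exact Or.inl ⟨h1, h2⟩
      · exact Or.inr ⟨h1, h2⟩
  have hget : ∀ h, (syncA a (m.insert a (m.getD a [] ++ m.getD b []))).get? h =
      if h ∈ (m.getD a [] ++ m.getD b []).map (fun e => e.2)
      then some (m.getD a [] ++ m.getD b []) else m.get? h := by
    intro h
    rw [get?_syncA, hm1a]
    by_cases hh : h ∈ (m.getD a [] ++ m.getD b []).map (fun e => e.2)
    · rw [if_pos hh, if_pos hh]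
    · have h1 : h ≠ a := by
        intro he
        exact hh (he ▸ (hHd a).2 ⟨ha, Or.inl rfl⟩)
      rw [if_neg hh, if_neg hh, PySem.Dict.get?_insert, if_neg h1]
  have hkeys : (syncA a (m.insert a (m.getD a [] ++ m.getD b []))).keys = m.keys := by
    rw [keys_syncA, hm1a, PySem.Dict.keys_insert_of_contains _ _
      (contains_true_of_get?_some _ (key_get? m [] ha))]
    apply update_self
    intro x hx
    exact ((hHd x).1 hx).1
  have hgetD : ∀ h, (syncA a (m.insert a (m.getD a [] ++ m.getD b []))).getD h [] =
      if h ∈ (m.getD a [] ++ m.getD b []).map (fun e => e.2)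
      then m.getD a [] ++ m.getD b [] else m.getD h [] := by
    intro h
    rw [PySem.Dict.getD_eq_get?_getD, hget]
    by_cases hh : h ∈ (m.getD a [] ++ m.getD b []).map (fun e => e.2)
    · rw [if_pos hh, if_pos hh]
      rfl
    · rw [if_neg hh, if_neg hh, ← PySem.Dict.getD_eq_get?_getD]
  have hkeysP2 : (parent.insert lose win).keys = parent.keys :=
    PySem.Dict.keys_insert_of_contains _ _ (contains_true_of_get?_some _ hlosefix)
  refine ⟨?_, ?_, ?_, hF2, ?_, ?_⟩
  · rw [hkeys, hkeysP2]; exact inv.keysP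
  · rw [hkeys]; exact inv.keysF
  · rw [hkeys]; exact inv.keysE
  · -- val_perm
    intro h hh
    rw [hkeys] at hh
    rw [hgetD]
    by_cases hmem : h ∈ (m.getD a [] ++ m.getD b []).map (fun e => e.2)
    · rw [if_pos hmem]
      have hhw : rootOf (parent.insert lose win) h = win :=
        (hwl_or h hh).2 ((hHd h).1 hmem).2
      have hfc : entries.filter
          (fun e => rootOf (parent.insert lose win) e.2 == rootOf (parent.insert lose win) h) =
          entries.filter (fun e => (rootOf parent e.2 == rootOf parent a) ||
            (rootOf parent e.2 == rootOf parent b)) := by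
        apply List.filter_congr
        intro e he
        have hem : e.2 ∈ m.keys := sim_entry_mem inv he
        rw [hhw]
        by_cases hor : rootOf parent e.2 = rootOf parent a ∨ rootOf parent e.2 = rootOf parent b
        · rw [((hwl_or e.2 hem).2 hor)]
          rcases hor with hx | hx
          · simp [hx]
          · simp [hx]
        · have h1 : rootOf (parent.insert lose win) e.2 ≠ win := fun hx =>
            hor ((hwl_or e.2 hem).1 hx)
          have h2 : ¬ (rootOf parent e.2 = rootOf parent a) := fun hx => hor (Or.inl hx)
          have h3 : ¬ (rootOf parent e.2 = rootOf parent b) := fun hx => hor (Or.inr hx)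
          rw [beq_eq_false_iff_ne.2 h1, beq_eq_false_iff_ne.2 h2, beq_eq_false_iff_ne.2 h3]
          rfl
      rw [hfc]
      have hdis : ∀ e ∈ entries, ¬((rootOf parent e.2 == rootOf parent a) = true ∧
          (rootOf parent e.2 == rootOf parent b) = true) := by
        rintro e _ ⟨h1, h2⟩
        exact hroots ((eq_of_beq h1).symm.trans (eq_of_beq h2))
      exact ((inv.val_perm a ha).append (inv.val_perm b hb)).trans
        (filter_or_perm entries _ _ hdis).symm
    · rw [if_neg hmem]
      have hnor : ¬ (rootOf parent h = rootOf parent a ∨ rootOf parent h = rootOf parent b) :=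
        fun hor => hmem ((hHd h).2 ⟨hh, hor⟩)
      have hh2 : rootOf (parent.insert lose win) h = rootOf parent h := by
        rw [hroot2 h hh, if_neg (fun hx => hnor (by
          rcases hwl with ⟨_, h2⟩ | ⟨_, h2⟩
          · exact Or.inr (h2 ▸ hx)
          · exact Or.inl (h2 ▸ hx)))]
      have hfc : entries.filter
          (fun e => rootOf (parent.insert lose win) e.2 == rootOf (parent.insert lose win) h) =
          entries.filter (fun e => rootOf parent e.2 == rootOf parent h) := by
        apply List.filter_congr
        intro e he
        have hem : e.2 ∈ m.keys := sim_entry_mem inv he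
        rw [hh2]
        by_cases hor : rootOf parent e.2 = rootOf parent a ∨ rootOf parent e.2 = rootOf parent b
        · have h1 : rootOf (parent.insert lose win) e.2 = win := (hwl_or e.2 hem).2 hor
          have h2 : rootOf parent e.2 ≠ rootOf parent h := by
            intro hx
            exact hnor (hx ▸ hor)
          have h3 : win ≠ rootOf parent h := by
            intro hx
            apply hnor
            rcases hwl with ⟨h4, _⟩ | ⟨h4, _⟩
            · exact Or.inl (hx.symm.trans h4)
            · exact Or.inr (hx.symm.trans h4)
          simp [h1, h2, h3]
        · have h1 : rootOf (parent.insert lose win) e.2 = rootOf parent e.2 := by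
            rw [hroot2 e.2 hem, if_neg (fun hx => hor (by
              rcases hwl with ⟨_, h2⟩ | ⟨_, h2⟩
              · exact Or.inr (h2 ▸ hx)
              · exact Or.inl (h2 ▸ hx)))]
          rw [h1]
      rw [hfc]
      exact inv.val_perm h hh
  · -- val_eq
    intro h h' hh hh' hr
    rw [hkeys] at hh hh'
    rw [hget, hget]
    by_cases hm1 : h ∈ (m.getD a [] ++ m.getD b []).map (fun e => e.2) <;>
      by_cases hm2 : h' ∈ (m.getD a [] ++ m.getD b []).map (fun e => e.2)
    · rw [if_pos hm1, if_pos hm2]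
    · exfalso
      have h1 : rootOf (parent.insert lose win) h = win := (hwl_or h hh).2 ((hHd h).1 hm1).2
      have h2 : rootOf (parent.insert lose win) h' ≠ win := fun hx =>
        hm2 ((hHd h').2 ⟨hh', (hwl_or h' hh').1 hx⟩)
      exact h2 (hr ▸ h1)
    · exfalso
      have h1 : rootOf (parent.insert lose win) h' = win := (hwl_or h' hh').2 ((hHd h').1 hm2).2
      have h2 : rootOf (parent.insert lose win) h ≠ win := fun hx =>
        hm1 ((hHd h).2 ⟨hh, (hwl_or h hh).1 hx⟩)
      exact h2 (hr ▸ h1)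
    · rw [if_neg hm1, if_neg hm2]
      have hh2 : rootOf (parent.insert lose win) h = rootOf parent h := by
        rw [hroot2 h hh, if_neg (fun hx => hm1 ((hHd h).2 ⟨hh, by
          rcases hwl with ⟨_, h2⟩ | ⟨_, h2⟩
          · exact Or.inr (h2 ▸ hx)
          · exact Or.inl (h2 ▸ hx)⟩))]
      have hh2' : rootOf (parent.insert lose win) h' = rootOf parent h' := by
        rw [hroot2 h' hh', if_neg (fun hx => hm2 ((hHd h').2 ⟨hh', by
          rcases hwl with ⟨_, h2⟩ | ⟨_, h2⟩
          · exact Or.inr (h2 ▸ hx)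
          · exact Or.inl (h2 ▸ hx)⟩))]
      exact inv.val_eq h h' hh hh' (by rw [← hh2, ← hh2', hr])

theorem closed_of_forest {parent : PySem.Dict String String} {firsti : PySem.Dict String Int}
    (hF : ForestInv parent firsti) :
    ∀ h p, parent.get? h = some p → p ∈ parent.keys := fun h p hp => (hF h p hp).1

theorem reaches2_one_fresh {parent : PySem.Dict String String} {firsti : PySem.Dict String Int}
    (hF : ForestInv parent firsti) {x r : String}
    (hx : x ∉ parent.keys) (hrfix : parent.get? r = some r)
    {win lose : String} (hwl : (win = x ∧ lose = r) ∨ (win = r ∧ lose = x)) :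
    (∀ h rh, Reaches parent h rh → rh ≠ r →
        Reaches ((parent.insert x x).insert lose win) h rh)
    ∧ (∀ h, Reaches parent h r → Reaches ((parent.insert x x).insert lose win) h win)
    ∧ Reaches ((parent.insert x x).insert lose win) x win := by
  have hrx : r ≠ x := fun he => hx (he ▸ mem_keys_of_get?_some _ hrfix)
  have hg1r : (parent.insert x x).get? r = some r := by
    rw [PySem.Dict.get?_insert, if_neg hrx]
    exact hrfix
  have hg1x : (parent.insert x x).get? x = some x := by
    rw [PySem.Dict.get?_insert_self]
  have hlose1 : (parent.insert x x).get? lose = some lose := by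
    rcases hwl with ⟨_, h2⟩ | ⟨_, h2⟩ <;> rw [h2]
    · exact hg1r
    · exact hg1x
  refine ⟨?_, ?_, ?_⟩
  · intro h rh hre hner
    have hre1 := reaches_insert_fresh hx hre
    have hrhm : rh ∈ parent.keys := (reaches_mem hre).2
    have hrhl : rh ≠ lose := by
      rcases hwl with ⟨_, h2⟩ | ⟨_, h2⟩ <;> rw [h2]
      · exact hner
      · exact fun he => hx (he ▸ hrhm)
    exact reaches_union_other hlose1 hre1 hrhl
  · intro h hre
    have hre1 := reaches_insert_fresh hx hre
    rcases hwl with ⟨h1, h2⟩ | ⟨h1, h2⟩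
    · rw [h1, h2]
      exact reaches_union_moved hg1x (fun he => hrx he.symm) hre1
    · rw [h1, h2]
      exact reaches_union_other hg1x hre1 hrx
  · have hrex1 : Reaches (parent.insert x x) x x := Reaches.root x hg1x
    rcases hwl with ⟨h1, h2⟩ | ⟨h1, h2⟩
    · rw [h1, h2]
      exact reaches_union_other hg1r hrex1 (fun he => hrx he.symm)
    · rw [h1, h2]
      exact reaches_union_moved hg1r hrx hrex1

-- ===== step preservation: a fresh, b known =====

theorem step_left {m : PySem.Dict String (List (Int × String))}
    {parent : PySem.Dict String String} {firsti : PySem.Dict String Int}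
    {entries : List (Int × String)} (inv : SimInv m parent firsti entries)
    {i : Int} {a b : String} (ha : a ∉ m.keys) (hb : b ∈ m.keys)
    {win lose : String}
    (hwl : (win = a ∧ lose = rootOf parent b) ∨ (win = rootOf parent b ∧ lose = a))
    (hlt : ufLt ((firsti.insert a i).getD win 0, win) ((firsti.insert a i).getD lose 0, lose)) :
    SimInv (syncA a ((m.insert b (m.getD b [] ++ [(i, a)])).insert a (m.getD b [] ++ [(i, a)])))
      ((parent.insert a a).insert lose win) (firsti.insert a i) (entries ++ [(i, a)]) := by
  obtain ⟨hrm, hrfix⟩ := sim_root_mem inv hb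
  have haP : a ∉ parent.keys := by rw [inv.keysP]; exact ha
  have hra : rootOf parent b ≠ a := fun he => ha (he ▸ hrm)
  have hF1 : ForestInv (parent.insert a a) (firsti.insert a i) :=
    forest_insert_fresh inv.forest haP i
  have hwin1 : (parent.insert a a).get? win = some win := by
    rcases hwl with ⟨h1, _⟩ | ⟨h1, _⟩ <;> rw [h1]
    · rw [PySem.Dict.get?_insert_self]
    · rw [PySem.Dict.get?_insert, if_neg hra]
      exact hrfix
  have hF2 : ForestInv ((parent.insert a a).insert lose win) (firsti.insert a i) :=
    forest_union hF1 hwin1 hlt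
  obtain ⟨hRold, hRmoved, hRx⟩ := reaches2_one_fresh inv.forest haP hrfix hwl
  -- the new root function
  have hr2_old : ∀ h, h ∈ m.keys →
      rootOf ((parent.insert a a).insert lose win) h =
        (if rootOf parent h = rootOf parent b then win else rootOf parent h) := by
    intro h hh
    have hre := rootOf_reaches inv.forest (by rw [inv.keysP]; exact hh)
    by_cases hl : rootOf parent h = rootOf parent b
    · rw [if_pos hl]
      exact rootOf_eq hF2 (hRmoved h (hl ▸ hre))
    · rw [if_neg hl]
      exact rootOf_eq hF2 (hRold h _ hre hl)
  have hr2_a : rootOf ((parent.insert a a).insert lose win) a = win := rootOf_eq hF2 hRx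
  have hwin_notin : win ∉ m.keys ∨ win = rootOf parent b := by
    rcases hwl with ⟨h1, _⟩ | ⟨h1, _⟩
    · exact Or.inl (h1 ▸ ha)
    · exact Or.inr h1
  have hwin_ne_old : ∀ h, h ∈ m.keys → rootOf parent h ≠ rootOf parent b →
      rootOf parent h ≠ win := by
    intro h hh hner he
    rcases hwl with ⟨h1, _⟩ | ⟨h1, _⟩
    · exact ha (by rw [← h1, ← he]; exact (sim_root_mem inv hh).1)
    · exact hner (he.trans h1)
  -- A-side facts
  have hm1a : ((m.insert b (m.getD b [] ++ [(i, a)])).insert a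
      (m.getD b [] ++ [(i, a)])).getD a [] = m.getD b [] ++ [(i, a)] := by
    rw [PySem.Dict.getD_eq_get?_getD, PySem.Dict.get?_insert_self]
    rfl
  have hHd : ∀ x, x ∈ (m.getD b [] ++ [(i, a)]).map (fun e => e.2) ↔
      ((x ∈ m.keys ∧ rootOf parent x = rootOf parent b) ∨ x = a) := by
    intro x
    rw [List.map_append, List.mem_append, mem_val_iff inv hb x]
    simp
  have hab : a ≠ b := fun he => ha (he ▸ hb)
  have hget : ∀ h, (syncA a ((m.insert b (m.getD b [] ++ [(i, a)])).insert a
      (m.getD b [] ++ [(i, a)]))).get? h =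
      if h ∈ (m.getD b [] ++ [(i, a)]).map (fun e => e.2)
      then some (m.getD b [] ++ [(i, a)]) else m.get? h := by
    intro h
    rw [get?_syncA, hm1a]
    by_cases hh : h ∈ (m.getD b [] ++ [(i, a)]).map (fun e => e.2)
    · rw [if_pos hh, if_pos hh]
    · have h1 : h ≠ a := fun he => hh ((hHd h).2 (Or.inr he))
      have h2 : h ≠ b := fun he => hh ((hHd h).2 (Or.inl (by rw [he]; exact ⟨hb, rfl⟩)))
      rw [if_neg hh, if_neg hh, PySem.Dict.get?_insert, if_neg h1,
        PySem.Dict.get?_insert, if_neg h2]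
  have hkeys : (syncA a ((m.insert b (m.getD b [] ++ [(i, a)])).insert a
      (m.getD b [] ++ [(i, a)]))).keys = m.keys ++ [a] := by
    rw [keys_syncA, hm1a]
    have h1 : ((m.insert b (m.getD b [] ++ [(i, a)])).insert a
        (m.getD b [] ++ [(i, a)])).keys = m.keys ++ [a] := by
      rw [PySem.Dict.keys_insert_of_not_contains, PySem.Dict.keys_insert_of_contains]
      · exact contains_true_of_get?_some _ (key_get? m [] hb)
      · apply contains_false_of_get?_none
        rw [PySem.Dict.get?_insert, if_neg hab]
        exact get?_none_of_not_mem m ha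
    rw [h1]
    apply update_self
    intro x hx
    rcases (hHd x).1 hx with ⟨h1', _⟩ | h1'
    · exact List.mem_append_left _ h1'
    · exact List.mem_append_right _ (by rw [h1']; exact List.mem_singleton_self _)
  have hgetD : ∀ h, (syncA a ((m.insert b (m.getD b [] ++ [(i, a)])).insert a
      (m.getD b [] ++ [(i, a)]))).getD h [] =
      if h ∈ (m.getD b [] ++ [(i, a)]).map (fun e => e.2)
      then m.getD b [] ++ [(i, a)] else m.getD h [] := by
    intro h
    rw [PySem.Dict.getD_eq_get?_getD, hget]
    by_cases hh : h ∈ (m.getD b [] ++ [(i, a)]).map (fun e => e.2)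
    · rw [if_pos hh, if_pos hh]
      rfl
    · rw [if_neg hh, if_neg hh, ← PySem.Dict.getD_eq_get?_getD]
  have hkeysP2 : ((parent.insert a a).insert lose win).keys = parent.keys ++ [a] := by
    have h1 : (parent.insert a a).keys = parent.keys ++ [a] :=
      PySem.Dict.keys_insert_of_not_contains _ _
        (contains_false_of_get?_none _ (get?_none_of_not_mem parent haP))
    have hlose1 : lose ∈ (parent.insert a a).keys := by
      rw [h1]
      rcases hwl with ⟨_, h2⟩ | ⟨_, h2⟩ <;> rw [h2]
      · exact List.mem_append_left _ (by rw [inv.keysP]; exact hrm)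
      · exact List.mem_append_right _ (List.mem_singleton_self _)
    rw [PySem.Dict.keys_insert_of_contains _ _ ((contains_iff_mem _ _).2 hlose1), h1]
  -- the new root of an old entry
  have hroot_entry : ∀ e, e ∈ entries →
      (rootOf ((parent.insert a a).insert lose win) e.2 == win) =
      (rootOf parent e.2 == rootOf parent b) := by
    intro e he
    have hem : e.2 ∈ m.keys := sim_entry_mem inv he
    rw [hr2_old e.2 hem]
    by_cases hc : rootOf parent e.2 = rootOf parent b
    · simp [hc]
    · rw [if_neg hc, beq_eq_false_iff_ne.2 (hwin_ne_old e.2 hem hc),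
        beq_eq_false_iff_ne.2 hc]
  set P2 := (parent.insert a a).insert lose win with hP2def
  -- class membership in the new forest
  have hcls : ∀ x, x ∈ m.keys ++ [a] →
      (x ∈ (m.getD b [] ++ [(i, a)]).map (fun e => e.2) ↔ rootOf P2 x = win) := by
    intro x hx
    constructor
    · intro hmx
      rcases (hHd x).1 hmx with ⟨h1, h2⟩ | h1
      · rw [hr2_old x h1, if_pos h2]
      · rw [h1]
        exact hr2_a
    · intro hrx
      rcases List.mem_append.1 hx with h1 | h1
      · refine (hHd x).2 (Or.inl ⟨h1, ?_⟩)
        by_contra hc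
        rw [hr2_old x h1, if_neg hc] at hrx
        exact hwin_ne_old x h1 hc hrx
      · exact (hHd x).2 (Or.inr (List.mem_singleton.1 h1))
  refine ⟨?_, ?_, ?_, hF2, ?_, ?_⟩
  · rw [hkeys, hkeysP2, inv.keysP]
  · rw [hkeys, PySem.Dict.keys_insert_of_not_contains _ _
      (contains_false_of_get?_none _ (get?_none_of_not_mem firsti (by rw [inv.keysF]; exact ha))),
      inv.keysF]
  · rw [hkeys]
    have hmap : (entries ++ [(i, a)]).map (fun e => e.2) =
        entries.map (fun e => e.2) ++ [a] := by simp
    rw [hmap, PySem.Set.ofList_append_singleton, ← inv.keysE,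
      PySem.Set.add_of_not_mem ha]
  · -- val_perm
    intro h hh
    rw [hkeys] at hh
    rw [hgetD]
    by_cases hmem : h ∈ (m.getD b [] ++ [(i, a)]).map (fun e => e.2)
    · rw [if_pos hmem]
      have hhw : rootOf P2 h = win := (hcls h hh).1 hmem
      rw [List.filter_append]
      have hfl : entries.filter (fun e => rootOf P2 e.2 == rootOf P2 h) =
          entries.filter (fun e => rootOf parent e.2 == rootOf parent b) := by
        apply List.filter_congr
        intro e he
        rw [hhw]
        exact hroot_entry e he
      have hfr : [(i, a)].filter (fun e => rootOf P2 e.2 == rootOf P2 h) = [(i, a)] := by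
        have : (rootOf P2 (i, a).2 == rootOf P2 h) = true := by
          rw [hhw]
          exact beq_iff_eq.2 hr2_a
        simp only [List.filter_cons, this, List.filter_nil, if_true]
      rw [hfl, hfr]
      exact (inv.val_perm b hb).append_right [(i, a)]
    · rw [if_neg hmem]
      have hh' : h ∈ m.keys := by
        rcases List.mem_append.1 hh with h1 | h1
        · exact h1
        · exact absurd ((hHd h).2 (Or.inr (List.mem_singleton.1 h1))) hmem
      have hner : rootOf parent h ≠ rootOf parent b := fun he =>
        hmem ((hHd h).2 (Or.inl ⟨hh', he⟩))
      have hh2 : rootOf P2 h = rootOf parent h := by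
        rw [hr2_old h hh', if_neg hner]
      rw [List.filter_append]
      have hfl : entries.filter (fun e => rootOf P2 e.2 == rootOf P2 h) =
          entries.filter (fun e => rootOf parent e.2 == rootOf parent h) := by
        apply List.filter_congr
        intro e he
        have hem := sim_entry_mem inv he
        rw [hh2, hr2_old e.2 hem]
        by_cases hc : rootOf parent e.2 = rootOf parent b
        · rw [if_pos hc]
          have e1 : (win == rootOf parent h) = false :=
            beq_eq_false_iff_ne.2 (fun he2 => hwin_ne_old h hh' hner he2.symm)
          have e2 : (rootOf parent e.2 == rootOf parent h) = false :=
            beq_eq_false_iff_ne.2 (fun he2 => hner (he2 ▸ hc ▸ rfl))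
          rw [e1, e2]
        · rw [if_neg hc]
      rw [hfl]
      have hfr : [(i, a)].filter (fun e => rootOf P2 e.2 == rootOf P2 h) = [] := by
        have : (rootOf P2 (i, a).2 == rootOf P2 h) = false := by
          rw [hh2]
          exact beq_eq_false_iff_ne.2 (fun he =>
            hwin_ne_old h hh' hner ((hr2_a ▸ he : win = rootOf parent h)).symm)
        simp only [List.filter_cons, this, List.filter_nil, if_false, Bool.false_eq_true]
      rw [hfr, List.append_nil]
      exact inv.val_perm h hh'
  · -- val_eq
    intro h h' hh hh' hr
    rw [hkeys] at hh hh'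
    rw [hget, hget]
    by_cases hm1 : h ∈ (m.getD b [] ++ [(i, a)]).map (fun e => e.2) <;>
      by_cases hm2 : h' ∈ (m.getD b [] ++ [(i, a)]).map (fun e => e.2)
    · rw [if_pos hm1, if_pos hm2]
    · exact absurd ((hcls h' hh').2 (hr ▸ (hcls h hh).1 hm1)) hm2
    · exact absurd ((hcls h hh).2 (hr.trans ((hcls h' hh').1 hm2))) hm1
    · rw [if_neg hm1, if_neg hm2]
      have hh1 : h ∈ m.keys := by
        rcases List.mem_append.1 hh with h1 | h1
        · exact h1
        · exact absurd ((hHd h).2 (Or.inr (List.mem_singleton.1 h1))) hm1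
      have hh1' : h' ∈ m.keys := by
        rcases List.mem_append.1 hh' with h1 | h1
        · exact h1
        · exact absurd ((hHd h').2 (Or.inr (List.mem_singleton.1 h1))) hm2
      have hner : rootOf parent h ≠ rootOf parent b := fun he =>
        hm1 ((hHd h).2 (Or.inl ⟨hh1, he⟩))
      have hner' : rootOf parent h' ≠ rootOf parent b := fun he =>
        hm2 ((hHd h').2 (Or.inl ⟨hh1', he⟩))
      have e1 : rootOf P2 h = rootOf parent h := by rw [hr2_old h hh1, if_neg hner]
      have e2 : rootOf P2 h' = rootOf parent h' := by rw [hr2_old h' hh1', if_neg hner']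
      exact inv.val_eq h h' hh1 hh1' (by rw [← e1, ← e2, hr])

-- ===== step preservation: a known, b fresh =====

theorem step_right {m : PySem.Dict String (List (Int × String))}
    {parent : PySem.Dict String String} {firsti : PySem.Dict String Int}
    {entries : List (Int × String)} (inv : SimInv m parent firsti entries)
    {i : Int} {a b : String} (ha : a ∈ m.keys) (hb : b ∉ m.keys)
    {win lose : String}
    (hwl : (win = b ∧ lose = rootOf parent a) ∨ (win = rootOf parent a ∧ lose = b))
    (hlt : ufLt ((firsti.insert b i).getD win 0, win) ((firsti.insert b i).getD lose 0, lose)) :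
    SimInv (syncA a (m.insert a (m.getD a [] ++ [(i, b)])))
      ((parent.insert b b).insert lose win) (firsti.insert b i) (entries ++ [(i, b)]) := by
  obtain ⟨hrm, hrfix⟩ := sim_root_mem inv ha
  have hbP : b ∉ parent.keys := by rw [inv.keysP]; exact hb
  have hrb : rootOf parent a ≠ b := fun he => hb (he ▸ hrm)
  have hF1 : ForestInv (parent.insert b b) (firsti.insert b i) :=
    forest_insert_fresh inv.forest hbP i
  have hwin1 : (parent.insert b b).get? win = some win := by
    rcases hwl with ⟨h1, _⟩ | ⟨h1, _⟩ <;> rw [h1]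
    · rw [PySem.Dict.get?_insert_self]
    · rw [PySem.Dict.get?_insert, if_neg hrb]
      exact hrfix
  have hF2 : ForestInv ((parent.insert b b).insert lose win) (firsti.insert b i) :=
    forest_union hF1 hwin1 hlt
  obtain ⟨hRold, hRmoved, hRx⟩ := reaches2_one_fresh inv.forest hbP hrfix hwl
  have hr2_old : ∀ h, h ∈ m.keys →
      rootOf ((parent.insert b b).insert lose win) h =
        (if rootOf parent h = rootOf parent a then win else rootOf parent h) := by
    intro h hh
    have hre := rootOf_reaches inv.forest (by rw [inv.keysP]; exact hh)
    by_cases hl : rootOf parent h = rootOf parent a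
    · rw [if_pos hl]
      exact rootOf_eq hF2 (hRmoved h (hl ▸ hre))
    · rw [if_neg hl]
      exact rootOf_eq hF2 (hRold h _ hre hl)
  have hr2_b : rootOf ((parent.insert b b).insert lose win) b = win := rootOf_eq hF2 hRx
  have hwin_ne_old : ∀ h, h ∈ m.keys → rootOf parent h ≠ rootOf parent a →
      rootOf parent h ≠ win := by
    intro h hh hner he
    rcases hwl with ⟨h1, _⟩ | ⟨h1, _⟩
    · exact hb (by rw [← h1, ← he]; exact (sim_root_mem inv hh).1)
    · exact hner (he.trans h1)
  -- A-side facts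
  have hm1a : (m.insert a (m.getD a [] ++ [(i, b)])).getD a [] =
      m.getD a [] ++ [(i, b)] := by
    rw [PySem.Dict.getD_eq_get?_getD, PySem.Dict.get?_insert_self]
    rfl
  have hHd : ∀ x, x ∈ (m.getD a [] ++ [(i, b)]).map (fun e => e.2) ↔
      ((x ∈ m.keys ∧ rootOf parent x = rootOf parent a) ∨ x = b) := by
    intro x
    rw [List.map_append, List.mem_append, mem_val_iff inv ha x]
    simp
  have hget : ∀ h, (syncA a (m.insert a (m.getD a [] ++ [(i, b)]))).get? h =
      if h ∈ (m.getD a [] ++ [(i, b)]).map (fun e => e.2)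
      then some (m.getD a [] ++ [(i, b)]) else m.get? h := by
    intro h
    rw [get?_syncA, hm1a]
    by_cases hh : h ∈ (m.getD a [] ++ [(i, b)]).map (fun e => e.2)
    · rw [if_pos hh, if_pos hh]
    · have h1 : h ≠ a := fun he => hh ((hHd h).2 (Or.inl (by rw [he]; exact ⟨ha, rfl⟩)))
      rw [if_neg hh, if_neg hh, PySem.Dict.get?_insert, if_neg h1]
  have hkeys : (syncA a (m.insert a (m.getD a [] ++ [(i, b)]))).keys = m.keys ++ [b] := by
    rw [keys_syncA, hm1a]
    have h1 : (m.insert a (m.getD a [] ++ [(i, b)])).keys = m.keys :=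
      PySem.Dict.keys_insert_of_contains _ _
        (contains_true_of_get?_some _ (key_get? m [] ha))
    rw [h1, List.map_append, PySem.Set.update_append]
    have h2 : PySem.Set.update m.keys ((m.getD a []).map (fun e => e.2)) = m.keys := by
      apply update_self
      intro x hx
      exact ((mem_val_iff inv ha x).1 hx).1
    rw [h2]
    show PySem.Set.update m.keys [b] = _
    rw [PySem.Set.update_cons, PySem.Set.update_nil, PySem.Set.add_of_not_mem hb]
  have hgetD : ∀ h, (syncA a (m.insert a (m.getD a [] ++ [(i, b)]))).getD h [] =
      if h ∈ (m.getD a [] ++ [(i, b)]).map (fun e => e.2)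
      then m.getD a [] ++ [(i, b)] else m.getD h [] := by
    intro h
    rw [PySem.Dict.getD_eq_get?_getD, hget]
    by_cases hh : h ∈ (m.getD a [] ++ [(i, b)]).map (fun e => e.2)
    · rw [if_pos hh, if_pos hh]
      rfl
    · rw [if_neg hh, if_neg hh, ← PySem.Dict.getD_eq_get?_getD]
  have hkeysP2 : ((parent.insert b b).insert lose win).keys = parent.keys ++ [b] := by
    have h1 : (parent.insert b b).keys = parent.keys ++ [b] :=
      PySem.Dict.keys_insert_of_not_contains _ _
        (contains_false_of_get?_none _ (get?_none_of_not_mem parent hbP))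
    have hlose1 : lose ∈ (parent.insert b b).keys := by
      rw [h1]
      rcases hwl with ⟨_, h2⟩ | ⟨_, h2⟩ <;> rw [h2]
      · exact List.mem_append_left _ (by rw [inv.keysP]; exact hrm)
      · exact List.mem_append_right _ (List.mem_singleton_self _)
    rw [PySem.Dict.keys_insert_of_contains _ _ ((contains_iff_mem _ _).2 hlose1), h1]
  have hroot_entry : ∀ e, e ∈ entries →
      (rootOf ((parent.insert b b).insert lose win) e.2 == win) =
      (rootOf parent e.2 == rootOf parent a) := by
    intro e he
    have hem : e.2 ∈ m.keys := sim_entry_mem inv he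
    rw [hr2_old e.2 hem]
    by_cases hc : rootOf parent e.2 = rootOf parent a
    · simp [hc]
    · rw [if_neg hc, beq_eq_false_iff_ne.2 (hwin_ne_old e.2 hem hc),
        beq_eq_false_iff_ne.2 hc]
  set P2 := (parent.insert b b).insert lose win with hP2def
  have hcls : ∀ x, x ∈ m.keys ++ [b] →
      (x ∈ (m.getD a [] ++ [(i, b)]).map (fun e => e.2) ↔ rootOf P2 x = win) := by
    intro x hx
    constructor
    · intro hmx
      rcases (hHd x).1 hmx with ⟨h1, h2⟩ | h1
      · rw [hr2_old x h1, if_pos h2]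
      · rw [h1]
        exact hr2_b
    · intro hrx
      rcases List.mem_append.1 hx with h1 | h1
      · refine (hHd x).2 (Or.inl ⟨h1, ?_⟩)
        by_contra hc
        rw [hr2_old x h1, if_neg hc] at hrx
        exact hwin_ne_old x h1 hc hrx
      · exact (hHd x).2 (Or.inr (List.mem_singleton.1 h1))
  refine ⟨?_, ?_, ?_, hF2, ?_, ?_⟩
  · rw [hkeys, hkeysP2, inv.keysP]
  · rw [hkeys, PySem.Dict.keys_insert_of_not_contains _ _
      (contains_false_of_get?_none _ (get?_none_of_not_mem firsti (by rw [inv.keysF]; exact hb))),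
      inv.keysF]
  · rw [hkeys]
    have hmap : (entries ++ [(i, b)]).map (fun e => e.2) =
        entries.map (fun e => e.2) ++ [b] := by simp
    rw [hmap, PySem.Set.ofList_append_singleton, ← inv.keysE,
      PySem.Set.add_of_not_mem hb]
  · -- val_perm
    intro h hh
    rw [hkeys] at hh
    rw [hgetD]
    by_cases hmem : h ∈ (m.getD a [] ++ [(i, b)]).map (fun e => e.2)
    · rw [if_pos hmem]
      have hhw : rootOf P2 h = win := (hcls h hh).1 hmem
      rw [List.filter_append]
      have hfl : entries.filter (fun e => rootOf P2 e.2 == rootOf P2 h) =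
          entries.filter (fun e => rootOf parent e.2 == rootOf parent a) := by
        apply List.filter_congr
        intro e he
        rw [hhw]
        exact hroot_entry e he
      have hfr : [(i, b)].filter (fun e => rootOf P2 e.2 == rootOf P2 h) = [(i, b)] := by
        have : (rootOf P2 (i, b).2 == rootOf P2 h) = true := by
          rw [hhw]
          exact beq_iff_eq.2 hr2_b
        simp only [List.filter_cons, this, List.filter_nil, if_true]
      rw [hfl, hfr]
      exact (inv.val_perm a ha).append_right [(i, b)]
    · rw [if_neg hmem]
      have hh' : h ∈ m.keys := by
        rcases List.mem_append.1 hh with h1 | h1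
        · exact h1
        · exact absurd ((hHd h).2 (Or.inr (List.mem_singleton.1 h1))) hmem
      have hner : rootOf parent h ≠ rootOf parent a := fun he =>
        hmem ((hHd h).2 (Or.inl ⟨hh', he⟩))
      have hh2 : rootOf P2 h = rootOf parent h := by
        rw [hr2_old h hh', if_neg hner]
      rw [List.filter_append]
      have hfl : entries.filter (fun e => rootOf P2 e.2 == rootOf P2 h) =
          entries.filter (fun e => rootOf parent e.2 == rootOf parent h) := by
        apply List.filter_congr
        intro e he
        have hem := sim_entry_mem inv he
        rw [hh2, hr2_old e.2 hem]
        by_cases hc : rootOf parent e.2 = rootOf parent a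
        · rw [if_pos hc]
          have e1 : (win == rootOf parent h) = false :=
            beq_eq_false_iff_ne.2 (fun he2 => hwin_ne_old h hh' hner he2.symm)
          have e2 : (rootOf parent e.2 == rootOf parent h) = false :=
            beq_eq_false_iff_ne.2 (fun he2 => hner (he2 ▸ hc ▸ rfl))
          rw [e1, e2]
        · rw [if_neg hc]
      rw [hfl]
      have hfr : [(i, b)].filter (fun e => rootOf P2 e.2 == rootOf P2 h) = [] := by
        have : (rootOf P2 (i, b).2 == rootOf P2 h) = false := by
          rw [hh2]
          exact beq_eq_false_iff_ne.2 (fun he =>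
            hwin_ne_old h hh' hner ((hr2_b ▸ he : win = rootOf parent h)).symm)
        simp only [List.filter_cons, this, List.filter_nil, if_false, Bool.false_eq_true]
      rw [hfr, List.append_nil]
      exact inv.val_perm h hh'
  · -- val_eq
    intro h h' hh hh' hr
    rw [hkeys] at hh hh'
    rw [hget, hget]
    by_cases hm1 : h ∈ (m.getD a [] ++ [(i, b)]).map (fun e => e.2) <;>
      by_cases hm2 : h' ∈ (m.getD a [] ++ [(i, b)]).map (fun e => e.2)
    · rw [if_pos hm1, if_pos hm2]
    · exact absurd ((hcls h' hh').2 (hr ▸ (hcls h hh).1 hm1)) hm2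
    · exact absurd ((hcls h hh).2 (hr.trans ((hcls h' hh').1 hm2))) hm1
    · rw [if_neg hm1, if_neg hm2]
      have hh1 : h ∈ m.keys := by
        rcases List.mem_append.1 hh with h1 | h1
        · exact h1
        · exact absurd ((hHd h).2 (Or.inr (List.mem_singleton.1 h1))) hm1
      have hh1' : h' ∈ m.keys := by
        rcases List.mem_append.1 hh' with h1 | h1
        · exact h1
        · exact absurd ((hHd h').2 (Or.inr (List.mem_singleton.1 h1))) hm2
      have hner : rootOf parent h ≠ rootOf parent a := fun he =>
        hm1 ((hHd h).2 (Or.inl ⟨hh1, he⟩))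
      have hner' : rootOf parent h' ≠ rootOf parent a := fun he =>
        hm2 ((hHd h').2 (Or.inl ⟨hh1', he⟩))
      have e1 : rootOf P2 h = rootOf parent h := by rw [hr2_old h hh1, if_neg hner]
      have e2 : rootOf P2 h' = rootOf parent h' := by rw [hr2_old h' hh1', if_neg hner']
      exact inv.val_eq h h' hh1 hh1' (by rw [← e1, ← e2, hr])

-- ===== step preservation: both handles fresh =====

theorem reaches2_two_fresh {parent : PySem.Dict String String} {firsti : PySem.Dict String Int}
    (hF : ForestInv parent firsti) {a b : String}
    (ha : a ∉ parent.keys) (hb : b ∉ parent.keys) (hab : a ≠ b)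
    {win lose : String} (hwl : (win = a ∧ lose = b) ∨ (win = b ∧ lose = a)) :
    (∀ h rh, Reaches parent h rh →
        Reaches (((parent.insert a a).insert b b).insert lose win) h rh)
    ∧ Reaches (((parent.insert a a).insert b b).insert lose win) a win
    ∧ Reaches (((parent.insert a a).insert b b).insert lose win) b win := by
  have hclosed1 : ∀ h p, (parent.insert a a).get? h = some p → p ∈ (parent.insert a a).keys := by
    intro h p hp
    rw [PySem.Dict.get?_insert] at hp
    by_cases hh : h = a
    · rw [if_pos hh] at hp
      rw [← (Option.some.inj hp)]
      exact (PySem.Dict.mem_keys_insert _ _ _ _).2 (Or.inl rfl)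
    · rw [if_neg hh] at hp
      exact (PySem.Dict.mem_keys_insert _ _ _ _).2 (Or.inr (closed_of_forest hF h p hp))
  have hb1 : b ∉ (parent.insert a a).keys := by
    intro hm
    rcases (PySem.Dict.mem_keys_insert _ _ _ _).1 hm with h1 | h1
    · exact hab h1.symm
    · exact hb h1
  have g12a : ((parent.insert a a).insert b b).get? a = some a := by
    rw [PySem.Dict.get?_insert, if_neg hab, PySem.Dict.get?_insert_self]
  have g12b : ((parent.insert a a).insert b b).get? b = some b := by
    rw [PySem.Dict.get?_insert_self]
  have glose : ((parent.insert a a).insert b b).get? lose = some lose := by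
    rcases hwl with ⟨_, h2⟩ | ⟨_, h2⟩ <;> rw [h2]
    · exact g12b
    · exact g12a
  refine ⟨?_, ?_, ?_⟩
  · intro h rh hre
    have hre1 := reaches_insert_fresh ha hre
    have hre12 := reaches_insert_fresh hb1 hre1
    have hrhm : rh ∈ parent.keys := (reaches_mem hre).2
    have hrhl : rh ≠ lose := by
      rcases hwl with ⟨_, h2⟩ | ⟨_, h2⟩ <;> rw [h2]
      · exact fun he => hb (he ▸ hrhm)
      · exact fun he => ha (he ▸ hrhm)
    exact reaches_union_other glose hre12 hrhl
  · rcases hwl with ⟨h1, h2⟩ | ⟨h1, h2⟩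
    · rw [h1, h2]
      exact reaches_union_other g12b (Reaches.root a g12a) hab
    · rw [h1, h2]
      exact reaches_union_moved g12b (fun he => hab he.symm) (Reaches.root a g12a)
  · rcases hwl with ⟨h1, h2⟩ | ⟨h1, h2⟩
    · rw [h1, h2]
      exact reaches_union_moved g12a hab (Reaches.root b g12b)
    · rw [h1, h2]
      exact reaches_union_other g12a (Reaches.root b g12b) (fun he => hab he.symm)

theorem step_new {m : PySem.Dict String (List (Int × String))}
    {parent : PySem.Dict String String} {firsti : PySem.Dict String Int}
    {entries : List (Int × String)} (inv : SimInv m parent firsti entries)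
    {i : Int} {a b : String} (ha : a ∉ m.keys) (hb : b ∉ m.keys) (hab : a ≠ b)
    {win lose : String} (hwl : (win = a ∧ lose = b) ∨ (win = b ∧ lose = a))
    (hlt : ufLt (((firsti.insert a i).insert b i).getD win 0, win)
                (((firsti.insert a i).insert b i).getD lose 0, lose)) :
    SimInv (syncA a (m.insert a [(i, a), (i, b)]))
      (((parent.insert a a).insert b b).insert lose win)
      ((firsti.insert a i).insert b i)
      (entries ++ [(i, a), (i, b)]) := by
  have haP : a ∉ parent.keys := by rw [inv.keysP]; exact ha
  have hbP : b ∉ parent.keys := by rw [inv.keysP]; exact hb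
  have hb1 : b ∉ (parent.insert a a).keys := by
    intro hm
    rcases (PySem.Dict.mem_keys_insert _ _ _ _).1 hm with h1 | h1
    · exact hab h1.symm
    · exact hbP h1
  have hF1 : ForestInv (parent.insert a a) (firsti.insert a i) :=
    forest_insert_fresh inv.forest haP i
  have hF12 : ForestInv ((parent.insert a a).insert b b) ((firsti.insert a i).insert b i) :=
    forest_insert_fresh hF1 hb1 i
  have gwin : ((parent.insert a a).insert b b).get? win = some win := by
    rcases hwl with ⟨h1, _⟩ | ⟨h1, _⟩ <;> rw [h1]
    · rw [PySem.Dict.get?_insert, if_neg hab, PySem.Dict.get?_insert_self]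
    · rw [PySem.Dict.get?_insert_self]
  have hF2 : ForestInv (((parent.insert a a).insert b b).insert lose win)
      ((firsti.insert a i).insert b i) := forest_union hF12 gwin hlt
  obtain ⟨hRold, hRa, hRb⟩ := reaches2_two_fresh inv.forest haP hbP hab hwl
  set P2 := ((parent.insert a a).insert b b).insert lose win with hP2def
  have hr2_old : ∀ h, h ∈ m.keys → rootOf P2 h = rootOf parent h := by
    intro h hh
    exact rootOf_eq hF2 (hRold h _ (rootOf_reaches inv.forest (by rw [inv.keysP]; exact hh)))
  have hr2_a : rootOf P2 a = win := rootOf_eq hF2 hRa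
  have hr2_b : rootOf P2 b = win := rootOf_eq hF2 hRb
  have hwin_ne_old : ∀ h, h ∈ m.keys → rootOf parent h ≠ win := by
    intro h hh he
    have := (sim_root_mem inv hh).1
    rcases hwl with ⟨h1, _⟩ | ⟨h1, _⟩
    · exact ha (by rw [← h1, ← he]; exact this)
    · exact hb (by rw [← h1, ← he]; exact this)
  -- A-side facts
  have hm1a : (m.insert a [(i, a), (i, b)]).getD a [] = [(i, a), (i, b)] := by
    rw [PySem.Dict.getD_eq_get?_getD, PySem.Dict.get?_insert_self]
    rfl
  have hget : ∀ h, (syncA a (m.insert a [(i, a), (i, b)])).get? h =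
      if h = a ∨ h = b then some [(i, a), (i, b)] else m.get? h := by
    intro h
    rw [get?_syncA, hm1a]
    by_cases hh : h = a ∨ h = b
    · rw [if_pos (by simpa using hh), if_pos hh]
    · have h1 : h ≠ a := fun e => hh (Or.inl e)
      have h2 : h ≠ b := fun e => hh (Or.inr e)
      rw [if_neg (by simp [h1, h2]), if_neg hh, PySem.Dict.get?_insert, if_neg h1]
  have hkeys : (syncA a (m.insert a [(i, a), (i, b)])).keys = m.keys ++ [a, b] := by
    rw [keys_syncA, hm1a]
    have h1 : (m.insert a [(i, a), (i, b)]).keys = m.keys ++ [a] :=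
      PySem.Dict.keys_insert_of_not_contains _ _
        (contains_false_of_get?_none _ (get?_none_of_not_mem m ha))
    rw [h1]
    show PySem.Set.update (m.keys ++ [a]) [a, b] = _
    rw [PySem.Set.update_cons, PySem.Set.update_cons, PySem.Set.update_nil,
      PySem.Set.add_of_mem (by simp : a ∈ m.keys ++ [a]),
      PySem.Set.add_of_not_mem (by
        have hba : ¬ b = a := fun he => hab he.symm
        simp [hb, hba]),
      List.append_assoc]
    rfl
  have hgetD : ∀ h, (syncA a (m.insert a [(i, a), (i, b)])).getD h [] =
      if h = a ∨ h = b then [(i, a), (i, b)] else m.getD h [] := by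
    intro h
    rw [PySem.Dict.getD_eq_get?_getD, hget]
    by_cases hh : h = a ∨ h = b
    · rw [if_pos hh, if_pos hh]
      rfl
    · rw [if_neg hh, if_neg hh, ← PySem.Dict.getD_eq_get?_getD]
  have hkeysP2 : P2.keys = parent.keys ++ [a, b] := by
    have h1 : (parent.insert a a).keys = parent.keys ++ [a] :=
      PySem.Dict.keys_insert_of_not_contains _ _
        (contains_false_of_get?_none _ (get?_none_of_not_mem parent haP))
    have h2 : ((parent.insert a a).insert b b).keys = (parent.keys ++ [a]) ++ [b] := by
      rw [PySem.Dict.keys_insert_of_not_contains _ _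
        (contains_false_of_get?_none _ (get?_none_of_not_mem _ hb1)), h1]
    have hlosem : lose ∈ ((parent.insert a a).insert b b).keys := by
      rw [h2]
      rcases hwl with ⟨_, h3⟩ | ⟨_, h3⟩ <;> rw [h3] <;> simp
    rw [hP2def, PySem.Dict.keys_insert_of_contains _ _ ((contains_iff_mem _ _).2 hlosem), h2,
      List.append_assoc]
    rfl
  have hr2mem : ∀ x, x ∈ m.keys ++ [a, b] → (rootOf P2 x = win ↔ (x = a ∨ x = b)) := by
    intro x hx
    constructor
    · intro hrx
      rcases List.mem_append.1 hx with h1 | h1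
      · exact absurd (hr2_old x h1 ▸ hrx) (hwin_ne_old x h1)
      · simpa using h1
    · rintro (h1 | h1)
      · rw [h1]
        exact hr2_a
      · rw [h1]
        exact hr2_b
  refine ⟨?_, ?_, ?_, hF2, ?_, ?_⟩
  · rw [hkeys, hkeysP2, inv.keysP]
  · rw [hkeys]
    have hbF1 : b ∉ (firsti.insert a i).keys := by
      intro hm
      rcases (PySem.Dict.mem_keys_insert _ _ _ _).1 hm with h1 | h1
      · exact hab h1.symm
      · exact hb (by rw [← inv.keysF]; exact h1)
    rw [PySem.Dict.keys_insert_of_not_contains _ _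
        (contains_false_of_get?_none _ (get?_none_of_not_mem _ hbF1)),
      PySem.Dict.keys_insert_of_not_contains _ _
        (contains_false_of_get?_none _ (get?_none_of_not_mem firsti
          (by rw [inv.keysF]; exact ha))),
      inv.keysF, List.append_assoc]
    rfl
  · rw [hkeys]
    have hmap : (entries ++ [(i, a), (i, b)]).map (fun e => e.2) =
        (entries.map (fun e => e.2) ++ [a]) ++ [b] := by simp
    rw [hmap, PySem.Set.ofList_append_singleton, PySem.Set.ofList_append_singleton,
      ← inv.keysE, PySem.Set.add_of_not_mem ha,
      PySem.Set.add_of_not_mem (by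
        have hba : ¬ b = a := fun he => hab he.symm
        simp [hb, hba]),
      List.append_assoc]
    rfl
  · -- val_perm
    intro h hh
    rw [hkeys] at hh
    rw [hgetD]
    by_cases hmem : h = a ∨ h = b
    · rw [if_pos hmem]
      have hhw : rootOf P2 h = win := (hr2mem h hh).2 hmem
      rw [List.filter_append]
      have hfl : entries.filter (fun e => rootOf P2 e.2 == rootOf P2 h) = [] := by
        apply List.filter_eq_nil_iff.2
        intro e he
        have hem := sim_entry_mem inv he
        rw [hhw, hr2_old e.2 hem]
        simp [hwin_ne_old e.2 hem]
      have hfr : [(i, a), (i, b)].filter (fun e => rootOf P2 e.2 == rootOf P2 h) =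
          [(i, a), (i, b)] := by
        have e1 : (rootOf P2 (i, a).2 == rootOf P2 h) = true := by
          rw [hhw]
          exact beq_iff_eq.2 hr2_a
        have e2 : (rootOf P2 (i, b).2 == rootOf P2 h) = true := by
          rw [hhw]
          exact beq_iff_eq.2 hr2_b
        simp only [List.filter_cons, e1, e2, List.filter_nil, if_true]
      rw [hfl, hfr, List.nil_append]
    · rw [if_neg hmem]
      have hh1 : h ∈ m.keys := by
        rcases List.mem_append.1 hh with h1 | h1
        · exact h1
        · exact absurd (by simpa using h1) hmem
      have hh2 : rootOf P2 h = rootOf parent h := hr2_old h hh1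
      rw [List.filter_append]
      have hfl : entries.filter (fun e => rootOf P2 e.2 == rootOf P2 h) =
          entries.filter (fun e => rootOf parent e.2 == rootOf parent h) := by
        apply List.filter_congr
        intro e he
        have hem := sim_entry_mem inv he
        rw [hh2, hr2_old e.2 hem]
      have hfr : [(i, a), (i, b)].filter (fun e => rootOf P2 e.2 == rootOf P2 h) = [] := by
        have hne : win ≠ rootOf P2 h := by
          rw [hh2]
          exact fun he => hwin_ne_old h hh1 he.symm
        have e1 : (rootOf P2 (i, a).2 == rootOf P2 h) = false :=
          beq_eq_false_iff_ne.2 (hr2_a ▸ hne)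
        have e2 : (rootOf P2 (i, b).2 == rootOf P2 h) = false :=
          beq_eq_false_iff_ne.2 (hr2_b ▸ hne)
        simp only [List.filter_cons, e1, e2, List.filter_nil, if_false, Bool.false_eq_true]
      rw [hfl, hfr, List.append_nil]
      exact inv.val_perm h hh1
  · -- val_eq
    intro h h' hh hh' hr
    rw [hkeys] at hh hh'
    rw [hget, hget]
    by_cases hm1 : h = a ∨ h = b <;> by_cases hm2 : h' = a ∨ h' = b
    · rw [if_pos hm1, if_pos hm2]
    · exact absurd ((hr2mem h' hh').1 (hr ▸ (hr2mem h hh).2 hm1)) hm2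
    · exact absurd ((hr2mem h hh).1 (hr.trans ((hr2mem h' hh').2 hm2))) hm1
    · rw [if_neg hm1, if_neg hm2]
      have hh1 : h ∈ m.keys := by
        rcases List.mem_append.1 hh with h1 | h1
        · exact h1
        · exact absurd (by simpa using h1) hm1
      have hh1' : h' ∈ m.keys := by
        rcases List.mem_append.1 hh' with h1 | h1
        · exact h1
        · exact absurd (by simpa using h1) hm2
      exact inv.val_eq h h' hh1 hh1'
        (by rw [← hr2_old h hh1, ← hr2_old h' hh1', hr])

theorem reaches2_self_fresh {parent : PySem.Dict String String} {firsti : PySem.Dict String Int}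
    (hF : ForestInv parent firsti) {a : String} (ha : a ∉ parent.keys) :
    (∀ h rh, Reaches parent h rh → Reaches ((parent.insert a a).insert a a) h rh)
    ∧ Reaches ((parent.insert a a).insert a a) a a := by
  have g1a : (parent.insert a a).get? a = some a := by rw [PySem.Dict.get?_insert_self]
  refine ⟨?_, Reaches.root a (by rw [PySem.Dict.get?_insert_self])⟩
  intro h rh hre
  exact reaches_insert_again g1a (reaches_insert_fresh ha hre)

theorem step_selfnew {m : PySem.Dict String (List (Int × String))}
    {parent : PySem.Dict String String} {firsti : PySem.Dict String Int}
    {entries : List (Int × String)} (inv : SimInv m parent firsti entries)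
    {i : Int} {a : String} (ha : a ∉ m.keys) :
    SimInv (syncA a (m.insert a [(i, a), (i, a)]))
      ((parent.insert a a).insert a a) ((firsti.insert a i).insert a i)
      (entries ++ [(i, a), (i, a)]) := by
  have haP : a ∉ parent.keys := by rw [inv.keysP]; exact ha
  have hF1 : ForestInv (parent.insert a a) (firsti.insert a i) :=
    forest_insert_fresh inv.forest haP i
  have hF2 : ForestInv ((parent.insert a a).insert a a) ((firsti.insert a i).insert a i) :=
    forest_insert_again hF1 (by rw [PySem.Dict.get?_insert_self])
      (by rw [PySem.Dict.getD_insert_self])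
  obtain ⟨hRold, hRa⟩ := reaches2_self_fresh inv.forest haP
  set P2 := (parent.insert a a).insert a a with hP2def
  have hr2_old : ∀ h, h ∈ m.keys → rootOf P2 h = rootOf parent h := by
    intro h hh
    exact rootOf_eq hF2 (hRold h _ (rootOf_reaches inv.forest (by rw [inv.keysP]; exact hh)))
  have hr2_a : rootOf P2 a = a := rootOf_eq hF2 hRa
  have ha_ne_old : ∀ h, h ∈ m.keys → rootOf parent h ≠ a := by
    intro h hh he
    exact ha (by rw [← he]; exact (sim_root_mem inv hh).1)
  -- A-side facts
  have hm1a : (m.insert a [(i, a), (i, a)]).getD a [] = [(i, a), (i, a)] := by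
    rw [PySem.Dict.getD_eq_get?_getD, PySem.Dict.get?_insert_self]
    rfl
  have hget : ∀ h, (syncA a (m.insert a [(i, a), (i, a)])).get? h =
      if h = a then some [(i, a), (i, a)] else m.get? h := by
    intro h
    rw [get?_syncA, hm1a]
    by_cases hh : h = a
    · rw [if_pos (by simp [hh]), if_pos hh]
    · rw [if_neg (by simp [hh]), if_neg hh, PySem.Dict.get?_insert, if_neg hh]
  have hkeys : (syncA a (m.insert a [(i, a), (i, a)])).keys = m.keys ++ [a] := by
    rw [keys_syncA, hm1a]
    have h1 : (m.insert a [(i, a), (i, a)]).keys = m.keys ++ [a] :=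
      PySem.Dict.keys_insert_of_not_contains _ _
        (contains_false_of_get?_none _ (get?_none_of_not_mem m ha))
    rw [h1]
    apply update_self
    intro x hx
    have : x = a := by simpa using hx
    simp [this]
  have hgetD : ∀ h, (syncA a (m.insert a [(i, a), (i, a)])).getD h [] =
      if h = a then [(i, a), (i, a)] else m.getD h [] := by
    intro h
    rw [PySem.Dict.getD_eq_get?_getD, hget]
    by_cases hh : h = a
    · rw [if_pos hh, if_pos hh]
      rfl
    · rw [if_neg hh, if_neg hh, ← PySem.Dict.getD_eq_get?_getD]
  have hkeysP2 : P2.keys = parent.keys ++ [a] := by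
    have h1 : (parent.insert a a).keys = parent.keys ++ [a] :=
      PySem.Dict.keys_insert_of_not_contains _ _
        (contains_false_of_get?_none _ (get?_none_of_not_mem parent haP))
    have ham : a ∈ (parent.insert a a).keys := by
      rw [h1]
      simp
    rw [hP2def, PySem.Dict.keys_insert_of_contains _ _ ((contains_iff_mem _ _).2 ham), h1]
  have hr2mem : ∀ x, x ∈ m.keys ++ [a] → (rootOf P2 x = a ↔ x = a) := by
    intro x hx
    constructor
    · intro hrx
      rcases List.mem_append.1 hx with h1 | h1
      · exact absurd (hr2_old x h1 ▸ hrx) (ha_ne_old x h1)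
      · simpa using h1
    · intro h1
      rw [h1]
      exact hr2_a
  refine ⟨?_, ?_, ?_, hF2, ?_, ?_⟩
  · rw [hkeys, hkeysP2, inv.keysP]
  · rw [hkeys]
    have ham : a ∈ (firsti.insert a i).keys := (PySem.Dict.mem_keys_insert _ _ _ _).2 (Or.inl rfl)
    rw [PySem.Dict.keys_insert_of_contains _ _ ((contains_iff_mem _ _).2 ham),
      PySem.Dict.keys_insert_of_not_contains _ _
        (contains_false_of_get?_none _ (get?_none_of_not_mem firsti
          (by rw [inv.keysF]; exact ha))),
      inv.keysF]
  · rw [hkeys]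
    have hmap : (entries ++ [(i, a), (i, a)]).map (fun e => e.2) =
        (entries.map (fun e => e.2) ++ [a]) ++ [a] := by simp
    rw [hmap, PySem.Set.ofList_append_singleton, PySem.Set.ofList_append_singleton,
      ← inv.keysE, PySem.Set.add_of_not_mem ha,
      PySem.Set.add_of_mem (by simp : a ∈ m.keys ++ [a])]
  · -- val_perm
    intro h hh
    rw [hkeys] at hh
    rw [hgetD]
    by_cases hmem : h = a
    · rw [if_pos hmem]
      have hhw : rootOf P2 h = a := (hr2mem h hh).2 hmem
      rw [List.filter_append]
      have hfl : entries.filter (fun e => rootOf P2 e.2 == rootOf P2 h) = [] := by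
        apply List.filter_eq_nil_iff.2
        intro e he
        have hem := sim_entry_mem inv he
        rw [hhw, hr2_old e.2 hem]
        simp [ha_ne_old e.2 hem]
      have hfr : [(i, a), (i, a)].filter (fun e => rootOf P2 e.2 == rootOf P2 h) =
          [(i, a), (i, a)] := by
        have e1 : (rootOf P2 (i, a).2 == rootOf P2 h) = true := by
          rw [hhw]
          exact beq_iff_eq.2 hr2_a
        simp only [List.filter_cons, e1, List.filter_nil, if_true]
      rw [hfl, hfr, List.nil_append]
    · rw [if_neg hmem]
      have hh1 : h ∈ m.keys := by
        rcases List.mem_append.1 hh with h1 | h1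
        · exact h1
        · exact absurd (by simpa using h1) hmem
      have hh2 : rootOf P2 h = rootOf parent h := hr2_old h hh1
      rw [List.filter_append]
      have hfl : entries.filter (fun e => rootOf P2 e.2 == rootOf P2 h) =
          entries.filter (fun e => rootOf parent e.2 == rootOf parent h) := by
        apply List.filter_congr
        intro e he
        have hem := sim_entry_mem inv he
        rw [hh2, hr2_old e.2 hem]
      have hfr : [(i, a), (i, a)].filter (fun e => rootOf P2 e.2 == rootOf P2 h) = [] := by
        have e1 : (rootOf P2 (i, a).2 == rootOf P2 h) = false := by
          rw [hr2_a, hh2]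
          exact beq_eq_false_iff_ne.2 (fun he => ha_ne_old h hh1 he.symm)
        simp only [List.filter_cons, e1, List.filter_nil, if_false, Bool.false_eq_true]
      rw [hfl, hfr, List.append_nil]
      exact inv.val_perm h hh1
  · -- val_eq
    intro h h' hh hh' hr
    rw [hkeys] at hh hh'
    rw [hget, hget]
    by_cases hm1 : h = a <;> by_cases hm2 : h' = a
    · rw [if_pos hm1, if_pos hm2]
    · exact absurd ((hr2mem h' hh').1 (hr ▸ (hr2mem h hh).2 hm1)) hm2
    · exact absurd ((hr2mem h hh).1 (hr.trans ((hr2mem h' hh').2 hm2))) hm1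
    · rw [if_neg hm1, if_neg hm2]
      have hh1 : h ∈ m.keys := by
        rcases List.mem_append.1 hh with h1 | h1
        · exact h1
        · exact absurd (by simpa using h1) hm1
      have hh1' : h' ∈ m.keys := by
        rcases List.mem_append.1 hh' with h1 | h1
        · exact h1
        · exact absurd (by simpa using h1) hm2
      exact inv.val_eq h h' hh1 hh1'
        (by rw [← hr2_old h hh1, ← hr2_old h' hh1', hr])

-- ===== initial state, one-step dispatch, fold, and the verdict =====

theorem simInv_init : SimInv PySem.Dict.empty PySem.Dict.empty PySem.Dict.empty [] := by
  refine ⟨?_, ?_, ?_, ?_, ?_, ?_⟩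
  · rw [PySem.Dict.keys_empty, PySem.Dict.keys_empty]
  · rw [PySem.Dict.keys_empty, PySem.Dict.keys_empty]
  · rw [PySem.Dict.keys_empty]
    rfl
  · intro h p hp
    rw [PySem.Dict.get?_empty] at hp
    cases hp
  · intro h hh
    rw [PySem.Dict.keys_empty] at hh
    cases hh
  · intro h h' hh _ _
    rw [PySem.Dict.keys_empty] at hh
    cases hh

theorem simInv_step (p : Int × (String × String))
    (m : PySem.Dict String (List (Int × String))) (parent : PySem.Dict String String)
    (firsti : PySem.Dict String Int) (entries : List (Int × String))
    (inv : SimInv m parent firsti entries) :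
    SimInv (genmergesStep m p) (genmergesAltStep (parent, firsti, entries) p).1
      (genmergesAltStep (parent, firsti, entries) p).2.1
      (genmergesAltStep (parent, firsti, entries) p).2.2 := by
  obtain ⟨i, a, b⟩ := p
  by_cases ha : a ∈ m.keys <;> by_cases hb : b ∈ m.keys
  · -- both handles known
    have hca : m.contains a = true := (contains_iff_mem m a).2 ha
    have hcb : m.contains b = true := (contains_iff_mem m b).2 hb
    have hcpa : parent.contains a = true :=
      (contains_iff_mem _ _).2 (by rw [inv.keysP]; exact ha)
    have hcpb : parent.contains b = true :=
      (contains_iff_mem _ _).2 (by rw [inv.keysP]; exact hb)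
    have hfilt : [a, b].filter (fun h => !(parent.contains h)) = [] := by
      simp [hcpa, hcpb]
    by_cases hroots : rootOf parent a = rootOf parent b
    · have hbeq : (m.getD a [] == m.getD b []) = true := beq_true_of_same_root inv ha hb hroots
      have e1 : genmergesStep m (i, (a, b)) = syncA a m := by
        simp [genmergesStep, syncA, hca, hcb, hbeq]
      have e2 : genmergesAltStep (parent, firsti, entries) (i, (a, b)) =
          (parent, firsti, entries) := by
        simp only [genmergesAltStep, hfilt, List.foldl_nil]
        rw [show findRootB parent.keys.length parent a = rootOf parent a from rfl,
            show findRootB parent.keys.length parent b = rootOf parent b from rfl]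
        rw [if_neg (fun hc => hc hroots)]
      rw [e1, e2]
      exact step_same inv ha
    · have hbeq : (m.getD a [] == m.getD b []) = false := beq_false_of_diff_root inv ha hb hroots
      have e1 : genmergesStep m (i, (a, b)) =
          syncA a (m.insert a (m.getD a [] ++ m.getD b [])) := by
        simp [genmergesStep, syncA, hca, hcb, hbeq]
      by_cases hcnd : firsti.getD (rootOf parent b) 0 < firsti.getD (rootOf parent a) 0 ∨
          (firsti.getD (rootOf parent b) 0 = firsti.getD (rootOf parent a) 0 ∧
            rootOf parent b < rootOf parent a)
      · have e2 : genmergesAltStep (parent, firsti, entries) (i, (a, b)) =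
            (parent.insert (rootOf parent a) (rootOf parent b), firsti, entries) := by
          simp only [genmergesAltStep, hfilt, List.foldl_nil]
          rw [show findRootB parent.keys.length parent a = rootOf parent a from rfl,
            show findRootB parent.keys.length parent b = rootOf parent b from rfl]
          rw [if_pos hroots, if_pos hcnd]
        rw [e1, e2]
        exact step_merge inv ha hb hroots (Or.inr ⟨rfl, rfl⟩) hcnd
      · have hne2 : ((firsti.getD (rootOf parent b) 0, rootOf parent b) : Int × String) ≠
            (firsti.getD (rootOf parent a) 0, rootOf parent a) := fun he =>
          hroots (congrArg Prod.snd he).symm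
        have hlt2 : ufLt (firsti.getD (rootOf parent a) 0, rootOf parent a)
            (firsti.getD (rootOf parent b) 0, rootOf parent b) := by
          rcases ufLt_total hne2 with h1 | h1
          · exact absurd h1 hcnd
          · exact h1
        have e2 : genmergesAltStep (parent, firsti, entries) (i, (a, b)) =
            (parent.insert (rootOf parent b) (rootOf parent a), firsti, entries) := by
          simp only [genmergesAltStep, hfilt, List.foldl_nil]
          rw [show findRootB parent.keys.length parent a = rootOf parent a from rfl,
            show findRootB parent.keys.length parent b = rootOf parent b from rfl]
          rw [if_pos hroots, if_neg hcnd]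
        rw [e1, e2]
        exact step_merge inv ha hb hroots (Or.inl ⟨rfl, rfl⟩) hlt2
  · -- a known, b fresh
    have hca : m.contains a = true := (contains_iff_mem m a).2 ha
    have hcb : m.contains b = false :=
      contains_false_of_get?_none _ (get?_none_of_not_mem m hb)
    have hcpa : parent.contains a = true :=
      (contains_iff_mem _ _).2 (by rw [inv.keysP]; exact ha)
    have hbP : b ∉ parent.keys := by rw [inv.keysP]; exact hb
    have hcpb : parent.contains b = false :=
      contains_false_of_get?_none _ (get?_none_of_not_mem parent hbP)
    have hfilt : [a, b].filter (fun h => !(parent.contains h)) = [b] := by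
      simp [hcpa, hcpb]
    have e1 : genmergesStep m (i, (a, b)) =
        syncA a (m.insert a (m.getD a [] ++ [(i, b)])) := by
      simp [genmergesStep, syncA, hca, hcb]
    have hF1 : ForestInv (parent.insert b b) (firsti.insert b i) :=
      forest_insert_fresh inv.forest hbP i
    obtain ⟨hrm, hrfix⟩ := sim_root_mem inv ha
    have hra : rootOf (parent.insert b b) a = rootOf parent a :=
      rootOf_eq hF1 (reaches_insert_fresh hbP
        (rootOf_reaches inv.forest (by rw [inv.keysP]; exact ha)))
    have hrb : rootOf (parent.insert b b) b = b :=
      rootOf_eq hF1 (Reaches.root b (by rw [PySem.Dict.get?_insert_self]))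
    have hne : rootOf parent a ≠ b := fun he => hb (he ▸ hrm)
    have hfb : (firsti.insert b i).getD b 0 = i := by rw [PySem.Dict.getD_insert_self]
    have hfa : (firsti.insert b i).getD (rootOf parent a) 0 = firsti.getD (rootOf parent a) 0 := by
      rw [PySem.Dict.getD_insert, if_neg hne]
    by_cases hcnd : (firsti.insert b i).getD b 0 < (firsti.insert b i).getD (rootOf parent a) 0 ∨
        ((firsti.insert b i).getD b 0 = (firsti.insert b i).getD (rootOf parent a) 0 ∧
          b < rootOf parent a)
    · have e2 : genmergesAltStep (parent, firsti, entries) (i, (a, b)) =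
          ((parent.insert b b).insert (rootOf parent a) b, firsti.insert b i,
            entries ++ [(i, b)]) := by
        simp only [genmergesAltStep, hfilt, List.foldl_cons, List.foldl_nil]
        rw [show findRootB (parent.insert b b).keys.length (parent.insert b b) a = rootOf (parent.insert b b) a from rfl,
            show findRootB (parent.insert b b).keys.length (parent.insert b b) b = rootOf (parent.insert b b) b from rfl]
        rw [hra, hrb, if_pos (fun he => hne he), if_pos hcnd]
      rw [e1, e2]
      exact step_right inv ha hb (Or.inl ⟨rfl, rfl⟩) (by rw [hfb, hfa] at hcnd ⊢; exact hcnd)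
    · have hne2 : ((i : Int), b) ≠ (firsti.getD (rootOf parent a) 0, rootOf parent a) :=
        fun he => hne (congrArg Prod.snd he).symm
      have hlt2 : ufLt ((firsti.insert b i).getD (rootOf parent a) 0, rootOf parent a)
          ((firsti.insert b i).getD b 0, b) := by
        rw [hfa, hfb]
        rcases ufLt_total hne2 with h1 | h1
        · exact absurd (by rw [hfa, hfb]; exact h1) hcnd
        · exact h1
      have e2 : genmergesAltStep (parent, firsti, entries) (i, (a, b)) =
          ((parent.insert b b).insert b (rootOf parent a), firsti.insert b i,
            entries ++ [(i, b)]) := by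
        simp only [genmergesAltStep, hfilt, List.foldl_cons, List.foldl_nil]
        rw [show findRootB (parent.insert b b).keys.length (parent.insert b b) a = rootOf (parent.insert b b) a from rfl,
            show findRootB (parent.insert b b).keys.length (parent.insert b b) b = rootOf (parent.insert b b) b from rfl]
        rw [hra, hrb, if_pos (fun he => hne he), if_neg hcnd]
      rw [e1, e2]
      exact step_right inv ha hb (Or.inr ⟨rfl, rfl⟩) hlt2
  · -- a fresh, b known
    have hca : m.contains a = false :=
      contains_false_of_get?_none _ (get?_none_of_not_mem m ha)
    have hcb : m.contains b = true := (contains_iff_mem m b).2 hb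
    have haP : a ∉ parent.keys := by rw [inv.keysP]; exact ha
    have hcpa : parent.contains a = false :=
      contains_false_of_get?_none _ (get?_none_of_not_mem parent haP)
    have hcpb : parent.contains b = true :=
      (contains_iff_mem _ _).2 (by rw [inv.keysP]; exact hb)
    have hfilt : [a, b].filter (fun h => !(parent.contains h)) = [a] := by
      simp [hcpa, hcpb]
    have e1 : genmergesStep m (i, (a, b)) =
        syncA a ((m.insert b (m.getD b [] ++ [(i, a)])).insert a (m.getD b [] ++ [(i, a)])) := by
      simp [genmergesStep, syncA, hca, hcb]
    have hF1 : ForestInv (parent.insert a a) (firsti.insert a i) :=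
      forest_insert_fresh inv.forest haP i
    obtain ⟨hrm, hrfix⟩ := sim_root_mem inv hb
    have hrb : rootOf (parent.insert a a) b = rootOf parent b :=
      rootOf_eq hF1 (reaches_insert_fresh haP
        (rootOf_reaches inv.forest (by rw [inv.keysP]; exact hb)))
    have hra : rootOf (parent.insert a a) a = a :=
      rootOf_eq hF1 (Reaches.root a (by rw [PySem.Dict.get?_insert_self]))
    have hne : rootOf parent b ≠ a := fun he => ha (he ▸ hrm)
    have hfa : (firsti.insert a i).getD a 0 = i := by rw [PySem.Dict.getD_insert_self]
    have hfb : (firsti.insert a i).getD (rootOf parent b) 0 = firsti.getD (rootOf parent b) 0 := by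
      rw [PySem.Dict.getD_insert, if_neg hne]
    by_cases hcnd : (firsti.insert a i).getD (rootOf parent b) 0 < (firsti.insert a i).getD a 0 ∨
        ((firsti.insert a i).getD (rootOf parent b) 0 = (firsti.insert a i).getD a 0 ∧
          rootOf parent b < a)
    · have e2 : genmergesAltStep (parent, firsti, entries) (i, (a, b)) =
          ((parent.insert a a).insert a (rootOf parent b), firsti.insert a i,
            entries ++ [(i, a)]) := by
        simp only [genmergesAltStep, hfilt, List.foldl_cons, List.foldl_nil]
        rw [show findRootB (parent.insert a a).keys.length (parent.insert a a) a = rootOf (parent.insert a a) a from rfl,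
            show findRootB (parent.insert a a).keys.length (parent.insert a a) b = rootOf (parent.insert a a) b from rfl]
        rw [hra, hrb, if_pos (fun he => hne he.symm), if_pos hcnd]
      rw [e1, e2]
      exact step_left inv ha hb (Or.inr ⟨rfl, rfl⟩) hcnd
    · have hne2 : (firsti.getD (rootOf parent b) 0, rootOf parent b) ≠ ((i : Int), a) :=
        fun he => hne (congrArg Prod.snd he)
      have hlt2 : ufLt ((firsti.insert a i).getD a 0, a)
          ((firsti.insert a i).getD (rootOf parent b) 0, rootOf parent b) := by
        rw [hfa, hfb]
        rcases ufLt_total hne2 with h1 | h1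
        · exact absurd (by rw [hfa, hfb]; exact h1) hcnd
        · exact h1
      have e2 : genmergesAltStep (parent, firsti, entries) (i, (a, b)) =
          ((parent.insert a a).insert (rootOf parent b) a, firsti.insert a i,
            entries ++ [(i, a)]) := by
        simp only [genmergesAltStep, hfilt, List.foldl_cons, List.foldl_nil]
        rw [show findRootB (parent.insert a a).keys.length (parent.insert a a) a = rootOf (parent.insert a a) a from rfl,
            show findRootB (parent.insert a a).keys.length (parent.insert a a) b = rootOf (parent.insert a a) b from rfl]
        rw [hra, hrb, if_pos (fun he => hne he.symm), if_neg hcnd]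
      rw [e1, e2]
      exact step_left inv ha hb (Or.inl ⟨rfl, rfl⟩) hlt2
  · -- both fresh
    have hca : m.contains a = false :=
      contains_false_of_get?_none _ (get?_none_of_not_mem m ha)
    have hcb : m.contains b = false :=
      contains_false_of_get?_none _ (get?_none_of_not_mem m hb)
    have haP : a ∉ parent.keys := by rw [inv.keysP]; exact ha
    have hbP : b ∉ parent.keys := by rw [inv.keysP]; exact hb
    have hcpa : parent.contains a = false :=
      contains_false_of_get?_none _ (get?_none_of_not_mem parent haP)
    have hcpb : parent.contains b = false :=
      contains_false_of_get?_none _ (get?_none_of_not_mem parent hbP)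
    have e1 : genmergesStep m (i, (a, b)) = syncA a (m.insert a [(i, a), (i, b)]) := by
      simp [genmergesStep, syncA, hca, hcb]
    by_cases hab : a = b
    · subst hab
      have hfilt : [a, a].filter (fun h => !(parent.contains h)) = [a, a] := by
        simp [hcpa]
      have e2 : genmergesAltStep (parent, firsti, entries) (i, (a, a)) =
          ((parent.insert a a).insert a a, (firsti.insert a i).insert a i,
            entries ++ [(i, a), (i, a)]) := by
        simp only [genmergesAltStep, hfilt, List.foldl_cons, List.foldl_nil]
        rw [if_neg (fun hc => hc rfl)]
        simp
      rw [e1, e2]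
      exact step_selfnew inv ha
    · have hfilt : [a, b].filter (fun h => !(parent.contains h)) = [a, b] := by
        simp [hcpa, hcpb]
      have hb1 : b ∉ (parent.insert a a).keys := by
        intro hm
        rcases (PySem.Dict.mem_keys_insert _ _ _ _).1 hm with h1 | h1
        · exact hab h1.symm
        · exact hbP h1
      have hF1 : ForestInv (parent.insert a a) (firsti.insert a i) :=
        forest_insert_fresh inv.forest haP i
      have hF12 : ForestInv ((parent.insert a a).insert b b) ((firsti.insert a i).insert b i) :=
        forest_insert_fresh hF1 hb1 i
      have hra : rootOf ((parent.insert a a).insert b b) a = a :=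
        rootOf_eq hF12 (Reaches.root a (by
          rw [PySem.Dict.get?_insert, if_neg hab, PySem.Dict.get?_insert_self]))
      have hrb : rootOf ((parent.insert a a).insert b b) b = b :=
        rootOf_eq hF12 (Reaches.root b (by rw [PySem.Dict.get?_insert_self]))
      have hfb : ((firsti.insert a i).insert b i).getD b 0 = i := by
        rw [PySem.Dict.getD_insert_self]
      have hfa : ((firsti.insert a i).insert b i).getD a 0 = i := by
        rw [PySem.Dict.getD_insert, if_neg hab, PySem.Dict.getD_insert_self]
      by_cases hba : b < a
      · have e2 : genmergesAltStep (parent, firsti, entries) (i, (a, b)) =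
            (((parent.insert a a).insert b b).insert a b,
              (firsti.insert a i).insert b i, entries ++ [(i, a), (i, b)]) := by
          simp only [genmergesAltStep, hfilt, List.foldl_cons, List.foldl_nil]
          rw [show findRootB ((parent.insert a a).insert b b).keys.length ((parent.insert a a).insert b b) a = rootOf ((parent.insert a a).insert b b) a from rfl,
            show findRootB ((parent.insert a a).insert b b).keys.length ((parent.insert a a).insert b b) b = rootOf ((parent.insert a a).insert b b) b from rfl]
          rw [hra, hrb, if_pos hab, if_pos (by rw [hfa, hfb]; exact Or.inr ⟨rfl, hba⟩)]
          simp
        rw [e1, e2]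
        exact step_new inv ha hb hab (Or.inr ⟨rfl, rfl⟩)
          (by rw [hfa, hfb]; exact Or.inr ⟨rfl, hba⟩)
      · have halt : a < b := by
          rcases lt_trichotomy a b with h1 | h1 | h1
          · exact h1
          · exact absurd h1 hab
          · exact absurd h1 hba
        have e2 : genmergesAltStep (parent, firsti, entries) (i, (a, b)) =
            (((parent.insert a a).insert b b).insert b a,
              (firsti.insert a i).insert b i, entries ++ [(i, a), (i, b)]) := by
          simp only [genmergesAltStep, hfilt, List.foldl_cons, List.foldl_nil]
          rw [show findRootB ((parent.insert a a).insert b b).keys.length ((parent.insert a a).insert b b) a = rootOf ((parent.insert a a).insert b b) a from rfl,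
            show findRootB ((parent.insert a a).insert b b).keys.length ((parent.insert a a).insert b b) b = rootOf ((parent.insert a a).insert b b) b from rfl]
          rw [hra, hrb, if_pos hab, if_neg (by
            rw [hfa, hfb]
            rintro (h1 | ⟨-, h1⟩)
            · exact absurd h1 (lt_irrefl _)
            · exact hba h1)]
          simp
        rw [e1, e2]
        exact step_new inv ha hb hab (Or.inl ⟨rfl, rfl⟩)
          (by rw [hfa, hfb]; exact Or.inr ⟨rfl, halt⟩)

theorem simInv_fold (l : List (Int × (String × String)))
    (m : PySem.Dict String (List (Int × String)))
    (s : PySem.Dict String String × PySem.Dict String Int × List (Int × String))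
    (inv : SimInv m s.1 s.2.1 s.2.2) :
    SimInv (l.foldl genmergesStep m) ((l.foldl genmergesAltStep s).1)
      ((l.foldl genmergesAltStep s).2.1) ((l.foldl genmergesAltStep s).2.2) := by
  induction l generalizing m s with
  | nil => exact inv
  | cons p tl ih =>
      obtain ⟨parent, firsti, entries⟩ := s
      rw [List.foldl_cons, List.foldl_cons]
      exact ih (genmergesStep m p) (genmergesAltStep (parent, firsti, entries) p)
        (simInv_step p m parent firsti entries inv)

-- ===== VERDICT (by name: the statement is the Claim_ definition above) =====
theorem genmerges_spec : Claim_equal_genmerges := by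
  intro mergepairs _
  show genmerges mergepairs = genmerges_alt mergepairs
  exact final_eq (simInv_fold (PySem.List.enumerate mergepairs 0) PySem.Dict.empty
    (PySem.Dict.empty, PySem.Dict.empty, []) simInv_init)
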